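-- pv_equiv track=rewrite | github.com/takechi-scratch/atcoder | abc_old/abc431/e/main.py | solve
-- ===== SOURCE A (Python) =====
-- from collections import deque
--
-- DIR = [(0, 1), (1, 0), (0, -1), (-1, 0)]
--
-- def solve(H: int, W: int, grid: list[list[int]]) -> int:
--     score = [[[10**2] * 4 for _ in range(W)] for _ in range(H)]
--     replaced = [[False] * W for _ in range(H)]
--     if grid[-1][-1] == "A":
--         score[-1][-1][0] = 0
--         score[-1][-1][1] = 1
--         score[-1][-1][3] = 1
--     elif grid[-1][-1] == "B":
--         score[-1][-1][0] = 1
--         score[-1][-1][1] = 0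
--         score[-1][-1][3] = 1
--     else:
--         score[-1][-1][0] = 1
--         score[-1][-1][1] = 1
--         score[-1][-1][3] = 0
--
--     bfs = deque([(H - 1, W - 1, 0), (H - 1, W - 1, 1), (H - 1, W - 1, 3)])
--     while len(bfs) > 0:
--         i, j, now_d = bfs.popleft()
--         now_score = score[i][j][now_d]
--         light_di, light_dj = DIR[now_d]
--
--         for next_d in range(4):
--             light_next_di, light_next_dj = DIR[next_d]
--             if light_di == light_next_di and light_dj == light_next_dj:
--                 continue
--
--             if (light_di == light_next_di and light_dj * -1 == light_next_dj) or (
--                 light_dj == light_next_dj and light_di * -1 == light_next_di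
--             ):
--                 continue
--
--             if score[i][j][next_d] > now_score + 1:
--                 score[i][j][next_d] = now_score + 1
--                 bfs.append((i, j, next_d))
--
--         di, dj = -light_di, -light_dj
--         if not (0 <= i + di < H and 0 <= j + dj < W):
--             continue
--
--         if grid[i + di][j + dj] == "A":
--             next_d = now_d
--         elif grid[i + di][j + dj] == "B":
--             light_next_di, light_next_dj = light_dj, light_di
--             next_d = DIR.index((light_next_di, light_next_dj))
--         else:
--             light_next_di, light_next_dj = -light_dj, -light_di
--             next_d = DIR.index((light_next_di, light_next_dj))
--
--         if score[i + di][j + dj][next_d] > now_score: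
--             score[i + di][j + dj][next_d] = now_score
--             bfs.appendleft((i + di, j + dj, next_d))
--
--     return score[0][0][0]
-- ===== SOURCE B (Python) =====
-- def solve(H: int, W: int, grid: list[list[int]]) -> int:
--     # Bellman-Ford style relax-to-fixpoint on a flat distance array instead of 0-1 BFS.
--     dist = [100] * (4 * H * W)
--     goal = grid[-1][-1]
--     k = 0 if goal == "A" else (1 if goal == "B" else 3)
--     for d in (0, 1, 3):
--         dist[((H - 1) * W + (W - 1)) * 4 + d] = 0 if d == k else 1
--
--     REFL_B = (1, 0, 3, 2)
--     REFL_O = (3, 2, 1, 0)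
--     DI = (0, 1, 0, -1)
--     DJ = (1, 0, -1, 0)
--     changed = True
--     while changed:
--         changed = False
--         for i in range(H):
--             for j in range(W):
--                 for d in range(4):
--                     base = dist[(i * W + j) * 4 + d]
--                     for nd in ((d + 1) % 4, (d + 3) % 4):
--                         if dist[(i * W + j) * 4 + nd] > base + 1:
--                             dist[(i * W + j) * 4 + nd] = base + 1
--                             changed = True
--                     ni, nj = i - DI[d], j - DJ[d]
--                     if 0 <= ni < H and 0 <= nj < W:
--                         c = grid[ni][nj]
--                         nd = d if c == "A" else (REFL_B[d] if c == "B" else REFL_O[d])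
--                         if dist[(ni * W + nj) * 4 + nd] > base:
--                             dist[(ni * W + nj) * 4 + nd] = base
--                             changed = True
--     return dist[0]
-- ===== Notes on version B (the rewrite author's own statement) =====
-- stated objective: alternative
-- what changed: Replaces A's deque-based 0-1 BFS over a nested 3-level score list by Bellman-Ford style relax-until-no-change sweeps over a single flat [100]*(4*H*W) distance array indexed by (i*W+j)*4+d, with the DIR.index reflection lookups replaced by precomputed turn/reflection tables; Pre_ excludes grids that do not cover the H*W area (or H,W < 1 or an empty last row), where A usually raises IndexError and otherwise returns a value depending on which cells its partial search reached.
-- outside the precondition, e.g. on solve(1, 1, [[], ['A']]): A returns 0, B returns 0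
import Mathlib
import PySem

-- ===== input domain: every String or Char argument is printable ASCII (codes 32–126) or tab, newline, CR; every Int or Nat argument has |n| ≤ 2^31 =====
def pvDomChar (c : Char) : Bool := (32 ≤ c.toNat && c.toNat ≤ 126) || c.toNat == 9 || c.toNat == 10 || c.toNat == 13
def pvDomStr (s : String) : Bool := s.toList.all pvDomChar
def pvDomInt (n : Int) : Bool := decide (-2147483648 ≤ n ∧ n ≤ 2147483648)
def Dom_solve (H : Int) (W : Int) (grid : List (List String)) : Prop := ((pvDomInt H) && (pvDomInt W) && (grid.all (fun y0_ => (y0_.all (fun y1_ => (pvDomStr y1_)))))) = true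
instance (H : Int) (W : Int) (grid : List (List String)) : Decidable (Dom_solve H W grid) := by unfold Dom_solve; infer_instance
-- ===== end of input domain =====

-- B replaces A's deque 0-1 BFS over a nested 3-level score list by Bellman–Ford
-- relax-until-stable sweeps over a single flat distance array with table-driven
-- reflections (equivalence is about the return value only).

-- ===== PORT A =====

-- DIR = [(0, 1), (1, 0), (0, -1), (-1, 0)]
def pvDIR : List (Int × Int) := [(0, 1), (1, 0), (0, -1), (-1, 0)]

-- score[i][j][d] (read)
def pvG (s : List (List (List Int))) (i j d : Int) : Int :=
  PySem.List.pyGetD (PySem.List.pyGetD (PySem.List.pyGetD s i []) j []) d 100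

-- score[i][j][d] = v (Python list assignment, negative indices from the end)
def pvS (s : List (List (List Int))) (i j d : Int) (v : Int) : List (List (List Int)) :=
  PySem.List.pySetD s i (PySem.List.pySetD (PySem.List.pyGetD s i []) j
    (PySem.List.pySetD (PySem.List.pyGetD (PySem.List.pyGetD s i []) j []) d v))

-- score = [[[10**2] * 4 for _ in range(W)] for _ in range(H)]
def pvInit (H W : Int) : List (List (List Int)) :=
  List.replicate H.toNat (List.replicate W.toNat (List.replicate 4 (100 : Int)))

-- the seeding of the three goal-cell states per grid[-1][-1]
def pvSeedA (H W : Int) (grid : List (List String)) : List (List (List Int)) :=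
  let s := pvInit H W
  let goal := PySem.List.pyGetD (PySem.List.pyGetD grid (-1) []) (-1) ""
  if goal = "A" then
    pvS (pvS (pvS s (-1) (-1) 0 0) (-1) (-1) 1 1) (-1) (-1) 3 1
  else if goal = "B" then
    pvS (pvS (pvS s (-1) (-1) 0 1) (-1) (-1) 1 0) (-1) (-1) 3 1
  else
    pvS (pvS (pvS s (-1) (-1) 0 1) (-1) (-1) 1 1) (-1) (-1) 3 0

-- body of 'for next_d in range(4)' (turn edges, weight 1)
def pvTurn (i j ldi ldj nowScore : Int)
    (acc : List (List (List Int)) × List (Int × Int × Int)) (nextD : Int) :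
    List (List (List Int)) × List (Int × Int × Int) :=
  let (ndi, ndj) := PySem.List.pyGetD pvDIR nextD (0, 0)
  if ldi = ndi ∧ ldj = ndj then acc
  else if (ldi = ndi ∧ ldj * (-1) = ndj) ∨ (ldj = ndj ∧ ldi * (-1) = ndi) then acc
  else if pvG acc.1 i j nextD > nowScore + 1 then
    (pvS acc.1 i j nextD (nowScore + 1), acc.2 ++ [(i, j, nextD)])
  else acc

-- one iteration of the while body after popping (i, j, nowD)
def pvStepA (H W : Int) (grid : List (List String)) (s : List (List (List Int)))
    (i j nowD : Int) (rest : List (Int × Int × Int)) :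
    List (List (List Int)) × List (Int × Int × Int) :=
  let nowScore := pvG s i j nowD
  let (ldi, ldj) := PySem.List.pyGetD pvDIR nowD (0, 0)
  let sq := (PySem.List.pyRange 0 4 1).foldl (pvTurn i j ldi ldj nowScore) (s, rest)
  let di := -ldi
  let dj := -ldj
  if 0 ≤ i + di ∧ i + di < H ∧ 0 ≤ j + dj ∧ j + dj < W then
    let c := PySem.List.pyGetD (PySem.List.pyGetD grid (i + di) []) (j + dj) ""
    let nextD : Int :=
      if c = "A" then nowD
      else if c = "B" then ((PySem.List.index? pvDIR (ldj, ldi)).getD 0 : Nat)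
      else ((PySem.List.index? pvDIR (-ldj, -ldi)).getD 0 : Nat)
    if pvG sq.1 (i + di) (j + dj) nextD > nowScore then
      (pvS sq.1 (i + di) (j + dj) nextD nowScore, (i + di, j + dj, nextD) :: sq.2)
    else sq
  else sq

-- while len(bfs) > 0: … (fuel is an upper bound on the number of iterations, proved sufficient)
def pvLoopA (H W : Int) (grid : List (List String)) :
    Nat → List (List (List Int)) → List (Int × Int × Int) → List (List (List Int))
  | 0, s, _ => s
  | _ + 1, s, [] => s
  | n + 1, s, (i, j, nowD) :: rest =>
    let r := pvStepA H W grid s i j nowD rest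
    pvLoopA H W grid n r.1 r.2

def solve (H : Int) (W : Int) (grid : List (List String)) : Int :=
  let s := pvSeedA H W grid
  let bfs := [(H - 1, W - 1, (0 : Int)), (H - 1, W - 1, 1), (H - 1, W - 1, 3)]
  pvG (pvLoopA H W grid (800 * H * W + 8).toNat s bfs) 0 0 0

-- ===== PORT B =====

-- REFL_B = (1, 0, 3, 2); REFL_O = (3, 2, 1, 0); DI = (0, 1, 0, -1); DJ = (1, 0, -1, 0)
def pvRB : List Int := [1, 0, 3, 2]
def pvRO : List Int := [3, 2, 1, 0]
def pvDI : List Int := [0, 1, 0, -1]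
def pvDJ : List Int := [1, 0, -1, 0]

-- dist = [100]*(4*H*W); k per goal char; for d in (0, 1, 3): dist[…] = 0 if d == k else 1
def pvSeedAlt (H W : Int) (grid : List (List String)) : List Int :=
  let dist := List.replicate (4 * H * W).toNat (100 : Int)
  let goal := PySem.List.pyGetD (PySem.List.pyGetD grid (-1) []) (-1) ""
  let k : Int := if goal = "A" then 0 else if goal = "B" then 1 else 3
  [(0 : Int), 1, 3].foldl (fun dist d =>
    PySem.List.pySetD dist (((H - 1) * W + (W - 1)) * 4 + d)
      (if d = k then 0 else 1)) dist

-- innermost 'for d in range(4)' body: two turn relaxations, then the reflection step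
def pvRelaxB (H W : Int) (grid : List (List String)) (a : List Int × Bool) (i j d : Int) :
    List Int × Bool :=
  let base := PySem.List.pyGetD a.1 ((i * W + j) * 4 + d) 100
  let a := [PySem.Int.mod (d + 1) 4, PySem.Int.mod (d + 3) 4].foldl
    (fun a nd =>
      if PySem.List.pyGetD a.1 ((i * W + j) * 4 + nd) 100 > base + 1 then
        (PySem.List.pySetD a.1 ((i * W + j) * 4 + nd) (base + 1), true)
      else a) a
  let ni := i - PySem.List.pyGetD pvDI d 0
  let nj := j - PySem.List.pyGetD pvDJ d 0
  if 0 ≤ ni ∧ ni < H ∧ 0 ≤ nj ∧ nj < W then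
    let c := PySem.List.pyGetD (PySem.List.pyGetD grid ni []) nj ""
    let nd : Int := if c = "A" then d
      else if c = "B" then PySem.List.pyGetD pvRB d 0
      else PySem.List.pyGetD pvRO d 0
    if PySem.List.pyGetD a.1 ((ni * W + nj) * 4 + nd) 100 > base then
      (PySem.List.pySetD a.1 ((ni * W + nj) * 4 + nd) base, true)
    else a
  else a

-- one full 'for i … for j … for d …' sweep
def pvSweepB (H W : Int) (grid : List (List String)) (s : List Int) : List Int × Bool :=
  (PySem.List.pyRange 0 H 1).foldl (fun a i =>
    (PySem.List.pyRange 0 W 1).foldl (fun a j =>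
      (PySem.List.pyRange 0 4 1).foldl (fun a d => pvRelaxB H W grid a i j d) a) a)
    (s, false)

-- while changed: … (fuel is an upper bound on the number of sweeps, proved sufficient)
def pvLoopAlt (H W : Int) (grid : List (List String)) : Nat → List Int → List Int
  | 0, s => s
  | n + 1, s =>
    let r := pvSweepB H W grid s
    if r.2 then pvLoopAlt H W grid n r.1 else r.1

def solve_alt (H : Int) (W : Int) (grid : List (List String)) : Int :=
  PySem.List.pyGetD (pvLoopAlt H W grid (400 * H * W + 4).toNat (pvSeedAlt H W grid)) 0 100

-- ===== PRECONDITION & SPEC =====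
-- Pre_ excludes inputs with H < 1 or W < 1 (A raises IndexError on its empty score array)
-- and grids that do not cover the H×W area or end in an empty row: there A usually raises
-- IndexError, and where its partial search happens not to touch the missing cells it still
-- returns; B does the natural thing and returns the same shortest-path value.
def Pre_solve (H : Int) (W : Int) (grid : List (List String)) : Prop :=
  1 ≤ H ∧ 1 ≤ W ∧ H ≤ (grid.length : Int) ∧
    (∀ r ∈ grid.take H.toNat, W ≤ (r.length : Int)) ∧
    1 ≤ ((PySem.List.pyGetD grid (-1) []).length : Int)
instance (H : Int) (W : Int) (grid : List (List String)) : Decidable (Pre_solve H W grid) := by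
  unfold Pre_solve; infer_instance

def pvWitness_solve : Int × Int × List (List String) := (2, 2, [["A", "B"], [".", "A"]])

def Spec_solve (H : Int) (W : Int) (grid : List (List String)) (out : Int) : Prop := out = solve_alt H W grid
instance (H : Int) (W : Int) (grid : List (List String)) (out : Int) : Decidable (Spec_solve H W grid out) := by unfold Spec_solve; infer_instance

-- ===== CLAIM (what is proved, stated in full; the proofs are below) =====
def Claim_equal_solve : Prop := ∀ (H : Int) (W : Int) (grid : List (List String)), Dom_solve H W grid → Pre_solve H W grid → Spec_solve H W grid (solve H W grid)

-- ===== LEMMAS AND PROOFS =====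


-- ---------- proof-side abbreviations: states, edges, walks ----------

def pvInR (H W : Int) (u : Int × Int × Int) : Prop :=
  0 ≤ u.1 ∧ u.1 < H ∧ 0 ≤ u.2.1 ∧ u.2.1 < W ∧ 0 ≤ u.2.2 ∧ u.2.2 < 4

-- DIR[d] as port A reads it
def pvDd (d : Int) : Int × Int := PySem.List.pyGetD pvDIR d (0, 0)

-- the weight-0 reflection move out of (i, j, d), if any
def pvMove (H W : Int) (grid : List (List String)) (i j d : Int) : Option (Int × Int × Int) :=
  if 0 ≤ i - (pvDd d).1 ∧ i - (pvDd d).1 < H ∧ 0 ≤ j - (pvDd d).2 ∧ j - (pvDd d).2 < W then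
    some (i - (pvDd d).1, j - (pvDd d).2,
      (if PySem.List.pyGetD (PySem.List.pyGetD grid (i - (pvDd d).1) []) (j - (pvDd d).2) "" = "A" then d
       else if PySem.List.pyGetD (PySem.List.pyGetD grid (i - (pvDd d).1) []) (j - (pvDd d).2) "" = "B" then
         ((PySem.List.index? pvDIR ((pvDd d).2, (pvDd d).1)).getD 0 : Nat)
       else ((PySem.List.index? pvDIR (-(pvDd d).2, -(pvDd d).1)).getD 0 : Nat)))
  else none

-- the relaxation edges both programs follow: three weight-1 turns, one weight-0 reflection
def pvEdge (H W : Int) (grid : List (List String)) (u v : Int × Int × Int) (w : Int) : Prop :=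
  (w = 1 ∧ v.1 = u.1 ∧ v.2.1 = u.2.1 ∧ 0 ≤ v.2.2 ∧ v.2.2 < 4 ∧ v.2.2 ≠ u.2.2 ∧
    PySem.Int.mod (v.2.2 + 2) 4 ≠ u.2.2) ∨
  (w = 0 ∧ pvMove H W grid u.1 u.2.1 u.2.2 = some v)

def pvSeedsOf (H W : Int) (goal : String) : List ((Int × Int × Int) × Int) :=
  if goal = "A" then [((H - 1, W - 1, 0), 0), ((H - 1, W - 1, 1), 1), ((H - 1, W - 1, 3), 1)]
  else if goal = "B" then [((H - 1, W - 1, 0), 1), ((H - 1, W - 1, 1), 0), ((H - 1, W - 1, 3), 1)]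
  else [((H - 1, W - 1, 0), 1), ((H - 1, W - 1, 1), 1), ((H - 1, W - 1, 3), 0)]

def pvSeeds (H W : Int) (grid : List (List String)) : List ((Int × Int × Int) × Int) :=
  pvSeedsOf H W (PySem.List.pyGetD (PySem.List.pyGetD grid (-1) []) (-1) "")

inductive pvWalk (H W : Int) (grid : List (List String)) : (Int × Int × Int) → Int → Prop
  | src (u : Int × Int × Int) (c : Int) : (u, c) ∈ pvSeeds H W grid → pvWalk H W grid u c
  | step (u : Int × Int × Int) (c : Int) (v : Int × Int × Int) (w : Int) :
      pvWalk H W grid u c → pvEdge H W grid u v w → pvWalk H W grid v (c + w)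

-- the four properties a finished distance valuation has
def pvBndF (H W : Int) (f : Int × Int × Int → Int) : Prop :=
  ∀ u, pvInR H W u → 0 ≤ f u ∧ f u ≤ 100

def pvConsF (H W : Int) (grid : List (List String)) (f : Int × Int × Int → Int) : Prop :=
  ∀ u, pvInR H W u → ∀ v w, pvEdge H W grid u v w → f v ≤ f u + w

def pvAchF (H W : Int) (grid : List (List String)) (f : Int × Int × Int → Int) : Prop :=
  ∀ u, pvInR H W u → f u = 100 ∨ pvWalk H W grid u (f u)

def pvSeedLeF (H W : Int) (grid : List (List String)) (f : Int × Int × Int → Int) : Prop :=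
  ∀ u c, (u, c) ∈ pvSeeds H W grid → f u ≤ c

-- ---------- edge targets ----------

theorem pvDd_facts (d : Int) (h0 : 0 ≤ d) (h4 : d < 4) :
    pvDd d ≠ (0, 0) ∧ ((PySem.List.index? pvDIR ((pvDd d).2, (pvDd d).1)).getD 0 < 4) ∧
      ((PySem.List.index? pvDIR (-(pvDd d).2, -(pvDd d).1)).getD 0 < 4) := by
  interval_cases d <;> decide

theorem pv_move_target {H W : Int} {grid : List (List String)} {i j d : Int}
    {m : Int × Int × Int} (h0 : 0 ≤ d) (h4 : d < 4)
    (hm : pvMove H W grid i j d = some m) :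
    pvInR H W m ∧ (m.1, m.2.1) ≠ (i, j) := by
  obtain ⟨hne, hB, hC⟩ := pvDd_facts d h0 h4
  unfold pvMove at hm
  split at hm
  · rename_i hg
    obtain ⟨hg1, hg2, hg3, hg4⟩ := hg
    cases hm
    refine ⟨⟨hg1, hg2, hg3, hg4, ?_, ?_⟩, ?_⟩
    · dsimp only
      split
      · exact h0
      · split <;> positivity
    · dsimp only
      split
      · exact h4
      · split
        · exact_mod_cast hB
        · exact_mod_cast hC
    · dsimp only
      intro hc
      rw [Prod.mk.injEq] at hc
      apply hne
      rw [Prod.ext_iff]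
      constructor
      · show (pvDd d).1 = 0; omega
      · show (pvDd d).2 = 0; omega
  · exact absurd hm (by simp)

theorem pv_edge_target {H W : Int} {grid : List (List String)} {u v : Int × Int × Int}
    {w : Int} (hu : pvInR H W u) (he : pvEdge H W grid u v w) :
    pvInR H W v ∧ 0 ≤ w ∧ w ≤ 1 ∧ v ≠ u := by
  obtain ⟨hu1, hu2, hu3, hu4, hu5, hu6⟩ := hu
  rcases he with ⟨hw, hv1, hv2, hd0, hd4, hdne, _⟩ | ⟨hw, hM⟩
  · refine ⟨⟨by omega, by omega, by omega, by omega, hd0, hd4⟩, by omega, by omega, ?_⟩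
    intro hc
    rw [hc] at hdne
    exact hdne rfl
  · obtain ⟨hInR, hne⟩ := pv_move_target hu5 hu6 hM
    refine ⟨hInR, by omega, by omega, ?_⟩
    intro hc
    apply hne
    rw [hc]

theorem pv_edge_turn {H W : Int} (grid : List (List String)) (i j d nd : Int)
    (hn0 : 0 ≤ nd) (hn4 : nd < 4) (h1 : nd ≠ d) (h2 : PySem.Int.mod (nd + 2) 4 ≠ d) :
    pvEdge H W grid (i, j, d) (i, j, nd) 1 :=
  Or.inl ⟨rfl, rfl, rfl, hn0, hn4, h1, h2⟩

theorem pv_edge_move {H W : Int} (grid : List (List String)) (i j d : Int)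
    {m : Int × Int × Int} (hM : pvMove H W grid i j d = some m) :
    pvEdge H W grid (i, j, d) m 0 :=
  Or.inr ⟨rfl, hM⟩

theorem pv_seeds_inR {H W : Int} (grid : List (List String)) (hH : 1 ≤ H) (hW : 1 ≤ W)
    {u : Int × Int × Int} {c : Int} (h : (u, c) ∈ pvSeeds H W grid) :
    pvInR H W u ∧ 0 ≤ c ∧ c ≤ 1 := by
  have base : ∀ d : Int, 0 ≤ d → d < 4 → pvInR H W (H - 1, W - 1, d) := by
    intro d h1 h2
    refine ⟨?_, ?_, ?_, ?_, ?_, ?_⟩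
    · show (0 : Int) ≤ H - 1; omega
    · show H - 1 < H; omega
    · show (0 : Int) ≤ W - 1; omega
    · show W - 1 < W; omega
    · show (0 : Int) ≤ d; omega
    · show d < 4; omega
  unfold pvSeeds pvSeedsOf at h
  split at h
  · simp only [List.mem_cons, Prod.mk.injEq, List.not_mem_nil, or_false] at h
    rcases h with ⟨h1, h2⟩ | ⟨h1, h2⟩ | ⟨h1, h2⟩ <;> subst h1 <;>
      exact ⟨base _ (by omega) (by omega), by omega, by omega⟩
  · split at h <;>
    · simp only [List.mem_cons, Prod.mk.injEq, List.not_mem_nil, or_false] at h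
      rcases h with ⟨h1, h2⟩ | ⟨h1, h2⟩ | ⟨h1, h2⟩ <;> subst h1 <;>
        exact ⟨base _ (by omega) (by omega), by omega, by omega⟩

theorem pv_walk_inR {H W : Int} {grid : List (List String)} (hH : 1 ≤ H) (hW : 1 ≤ W)
    {u : Int × Int × Int} {c : Int} (h : pvWalk H W grid u c) : pvInR H W u := by
  induction h with
  | src u c hm => exact (pv_seeds_inR grid hH hW hm).1
  | step u c v w hw he ih => exact (pv_edge_target ih he).1

-- ---------- uniqueness of the relaxed fixpoint ----------

theorem pv_walk_le {H W : Int} {grid : List (List String)} {f : Int × Int × Int → Int}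
    (hH : 1 ≤ H) (hW : 1 ≤ W) (hc : pvConsF H W grid f) (hs : pvSeedLeF H W grid f) :
    ∀ u c, pvWalk H W grid u c → f u ≤ c := by
  intro u c h
  induction h with
  | src u c hm => exact hs u c hm
  | step u c v w hw he ih =>
    have hu := pv_walk_inR hH hW hw
    have := hc u hu v w he
    omega

theorem pv_le_of_inv {H W : Int} {grid : List (List String)} {f g : Int × Int × Int → Int}
    (hH : 1 ≤ H) (hW : 1 ≤ W) (hbf : pvBndF H W f) (hcf : pvConsF H W grid f)
    (hsf : pvSeedLeF H W grid f) (hag : pvAchF H W grid g) :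
    ∀ u, pvInR H W u → f u ≤ g u := by
  intro u hu
  rcases hag u hu with h100 | hwalk
  · rw [h100]
    exact (hbf u hu).2
  · exact pv_walk_le hH hW hcf hsf u _ hwalk

theorem pv_unique {H W : Int} {grid : List (List String)} {f g : Int × Int × Int → Int}
    (hH : 1 ≤ H) (hW : 1 ≤ W)
    (hbf : pvBndF H W f) (hcf : pvConsF H W grid f) (hsf : pvSeedLeF H W grid f)
    (haf : pvAchF H W grid f)
    (hbg : pvBndF H W g) (hcg : pvConsF H W grid g) (hsg : pvSeedLeF H W grid g)
    (hag : pvAchF H W grid g) :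
    ∀ u, pvInR H W u → f u = g u := by
  intro u hu
  exact le_antisymm (pv_le_of_inv hH hW hbf hcf hsf hag u hu)
    (pv_le_of_inv hH hW hbg hcg hsg haf u hu)

-- ---------- raw list layer ----------

theorem pv_pySetD_natCast {α : Type} (xs : List α) (n : Nat) (v : α) :
    PySem.List.pySetD xs (n : Int) v = xs.set n v := by
  by_cases h : n < xs.length
  · simp [PySem.List.pySetD, PySem.List.pySet?, PySem.List.pyIdx?, h]
  · have h2 : xs.set n v = xs := List.set_eq_of_length_le (by omega)
    rw [h2]
    have h3 : PySem.List.pyIdx? xs.length (n : Int) = none := by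
      simp only [PySem.List.pyIdx?]
      rw [if_pos (by omega), if_neg (by omega)]
    simp [PySem.List.pySetD, PySem.List.pySet?, h3]

theorem pv_pySetD_nonneg {α : Type} (xs : List α) {i : Int} (hi : 0 ≤ i) (v : α) :
    PySem.List.pySetD xs i v = xs.set i.toNat v := by
  have h := pv_pySetD_natCast xs i.toNat v
  rwa [Int.toNat_of_nonneg hi] at h

theorem pv_getD_set {α : Type} (xs : List α) (n m : Nat) (v d : α) :
    (xs.set n v).getD m d = if m = n ∧ n < xs.length then v else xs.getD m d := by
  rcases Decidable.em (m = n ∧ n < xs.length) with h | h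
  · obtain ⟨rfl, h2⟩ := h
    simp [List.getD_eq_getElem?_getD, h2]
  · rw [if_neg h]
    rcases Decidable.em (m = n) with rfl | hmn
    · have h2 : ¬ m < xs.length := fun hc => h ⟨rfl, hc⟩
      rw [List.set_eq_of_length_le (by omega)]
    · rw [List.getD_eq_getElem?_getD, List.getD_eq_getElem?_getD, List.getElem?_set,
        if_neg (by omega : ¬ n = m)]

theorem pv_mem_pySetD {α : Type} {xs : List α} {i : Int} {v x : α}
    (hx : x ∈ PySem.List.pySetD xs i v) : x ∈ xs ∨ x = v := by
  rcases hk : PySem.List.pyIdx? xs.length i with _ | k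
  · simp only [PySem.List.pySetD, PySem.List.pySet?, hk, Option.map_none,
      Option.getD_none] at hx
    exact Or.inl hx
  · simp only [PySem.List.pySetD, PySem.List.pySet?, hk, Option.map_some,
      Option.getD_some] at hx
    rcases List.mem_or_eq_of_mem_set hx with h | h
    · exact Or.inl h
    · exact Or.inr h

theorem pv_sum_set (l : List Int) : ∀ (n : Nat), n < l.length → ∀ (v : Int),
    (l.set n v).sum = l.sum + v - l.getD n 0 := by
  induction l with
  | nil => intro n h; simp at h
  | cons a t ih =>
    intro n h v
    cases n with
    | zero => simp; ring
    | succ m =>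
      simp only [List.set_cons_succ, List.sum_cons, List.getD_cons_succ]
      rw [ih m (by simpa using h) v]
      ring


-- ---------- A side: the nested score list ----------

def pvShape (H W : Int) (s : List (List (List Int))) : Prop :=
  s.length = H.toNat ∧ ∀ r ∈ s, r.length = W.toNat ∧ ∀ c ∈ r, c.length = 4

def pvLB (s : List (List (List Int))) : Prop :=
  ∀ r ∈ s, ∀ c ∈ r, ∀ x ∈ c, 0 ≤ x ∧ x ≤ 100

def pvGU (s : List (List (List Int))) (u : Int × Int × Int) : Int := pvG s u.1 u.2.1 u.2.2

def pvSU (s : List (List (List Int))) (u : Int × Int × Int) (v : Int) :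
    List (List (List Int)) := pvS s u.1 u.2.1 u.2.2 v

def pvSum (s : List (List (List Int))) : Int :=
  (s.map (fun r => (r.map (fun c => c.sum)).sum)).sum

structure pvInv (H W : Int) (grid : List (List String)) (s : List (List (List Int))) : Prop where
  shape : pvShape H W s
  lb : pvLB s
  ach : pvAchF H W grid (pvGU s)
  seedLe : pvSeedLeF H W grid (pvGU s)

theorem pvG_eq (s : List (List (List Int))) {i j d : Int}
    (hi : 0 ≤ i) (hj : 0 ≤ j) (hd : 0 ≤ d) :
    pvG s i j d = ((s.getD i.toNat []).getD j.toNat []).getD d.toNat 100 := by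
  unfold pvG
  rw [PySem.List.pyGetD_of_nonneg _ _ hi, PySem.List.pyGetD_of_nonneg _ _ hj,
    PySem.List.pyGetD_of_nonneg _ _ hd]

theorem pvS_eq (s : List (List (List Int))) {i j d : Int} (v : Int)
    (hi : 0 ≤ i) (hj : 0 ≤ j) (hd : 0 ≤ d) :
    pvS s i j d v =
      s.set i.toNat ((s.getD i.toNat []).set j.toNat
        (((s.getD i.toNat []).getD j.toNat []).set d.toNat v)) := by
  unfold pvS
  rw [PySem.List.pyGetD_of_nonneg _ _ hi, PySem.List.pyGetD_of_nonneg _ _ hj,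
    pv_pySetD_nonneg _ hd, pv_pySetD_nonneg _ hj, pv_pySetD_nonneg _ hi]

theorem pv_shape_pvS {H W : Int} {s : List (List (List Int))} (hs : pvShape H W s)
    {u : Int × Int × Int} (hu : pvInR H W u) (v : Int) : pvShape H W (pvSU s u v) := by
  obtain ⟨hu1, hu2, hu3, hu4, hu5, hu6⟩ := hu
  unfold pvSU
  rw [pvS_eq _ _ hu1 hu3 hu5]
  obtain ⟨hlen, hrows⟩ := hs
  have hiN : u.1.toNat < s.length := by omega
  have hrow : s.getD u.1.toNat [] ∈ s := by
    rw [List.getD_eq_getElem _ _ hiN]; exact List.getElem_mem hiN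
  obtain ⟨hrlen, hcells⟩ := hrows _ hrow
  have hjN : u.2.1.toNat < (s.getD u.1.toNat []).length := by omega
  have hcell : (s.getD u.1.toNat []).getD u.2.1.toNat [] ∈ s.getD u.1.toNat [] := by
    rw [List.getD_eq_getElem _ _ hjN]; exact List.getElem_mem hjN
  refine ⟨by simpa using hlen, ?_⟩
  intro r hr
  rcases List.mem_or_eq_of_mem_set hr with h | rfl
  · exact hrows _ h
  · refine ⟨by simpa using hrlen, ?_⟩
    intro c hc
    rcases List.mem_or_eq_of_mem_set hc with h | rfl
    · exact hcells _ h
    · simpa using hcells _ hcell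

theorem pv_lb_pvS {s : List (List (List Int))} (hlb : pvLB s) (u : Int × Int × Int) {v : Int}
    (hv : 0 ≤ v ∧ v ≤ 100) : pvLB (pvSU s u v) := by
  unfold pvSU pvS
  have hrow : ∀ r ∈ s, ∀ c ∈ r, ∀ x ∈ c, 0 ≤ x ∧ x ≤ 100 := hlb
  have hrowD : ∀ c ∈ PySem.List.pyGetD s u.1 [], ∀ x ∈ c, 0 ≤ x ∧ x ≤ 100 := by
    by_cases h : PySem.Raise.InRange s.length u.1
    · exact hrow _ (PySem.List.pyGetD_mem _ _ h)
    · rw [PySem.List.pyGetD_of_none _ _ _ ((PySem.List.pyGet?_eq_none_iff _ _).mpr h)]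
      intro c hc; simp at hc
  have hcellD' : ∀ x ∈ PySem.List.pyGetD (PySem.List.pyGetD s u.1 []) u.2.1 [], 0 ≤ x ∧ x ≤ 100 := by
    by_cases h : PySem.Raise.InRange (PySem.List.pyGetD s u.1 []).length u.2.1
    · exact hrowD _ (PySem.List.pyGetD_mem _ _ h)
    · rw [PySem.List.pyGetD_of_none _ _ _ ((PySem.List.pyGet?_eq_none_iff _ _).mpr h)]
      intro x hx; simp at hx
  intro r hr
  rcases pv_mem_pySetD hr with h | rfl
  · exact hlb _ h
  · intro c hc
    rcases pv_mem_pySetD hc with h | rfl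
    · exact hrowD _ h
    · intro x hx
      rcases pv_mem_pySetD hx with h | rfl
      · exact hcellD' _ h
      · exact hv

theorem pv_getD3_set3 (s : List (List (List Int))) (iN jN dN aN bN cN : Nat)
    (hi : iN < s.length) (hj : jN < (s.getD iN []).length)
    (hd : dN < ((s.getD iN []).getD jN []).length) (v : Int) :
    (((s.set iN ((s.getD iN []).set jN (((s.getD iN []).getD jN []).set dN v))).getD aN
          []).getD bN []).getD cN 100 =
      if aN = iN ∧ bN = jN ∧ cN = dN then v
      else ((s.getD aN []).getD bN []).getD cN 100 := by
  rw [pv_getD_set]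
  by_cases e1 : aN = iN
  · subst e1
    rw [if_pos ⟨rfl, hi⟩, pv_getD_set]
    by_cases e2 : bN = jN
    · subst e2
      rw [if_pos ⟨rfl, hj⟩, pv_getD_set]
      by_cases e3 : cN = dN
      · subst e3
        rw [if_pos ⟨rfl, hd⟩, if_pos ⟨rfl, rfl, rfl⟩]
      · rw [if_neg (by tauto), if_neg (by tauto)]
    · rw [if_neg (by tauto), if_neg (by tauto)]
  · rw [if_neg (by tauto), if_neg (by tauto)]

theorem pvG_pvS {H W : Int} {s : List (List (List Int))} (hs : pvShape H W s)
    {u x : Int × Int × Int} (hu : pvInR H W u) (hx1 : 0 ≤ x.1) (hx2 : 0 ≤ x.2.1)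
    (hx3 : 0 ≤ x.2.2) (v : Int) :
    pvGU (pvSU s u v) x = if x = u then v else pvGU s x := by
  obtain ⟨hu1, hu2, hu3, hu4, hu5, hu6⟩ := hu
  obtain ⟨hlen, hrows⟩ := hs
  have hiN : u.1.toNat < s.length := by omega
  have hrowmem : s.getD u.1.toNat [] ∈ s := by
    rw [List.getD_eq_getElem _ _ hiN]; exact List.getElem_mem hiN
  obtain ⟨hrlen, hcells⟩ := hrows _ hrowmem
  have hjN : u.2.1.toNat < (s.getD u.1.toNat []).length := by omega
  have hcellmem : (s.getD u.1.toNat []).getD u.2.1.toNat [] ∈ s.getD u.1.toNat [] := by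
    rw [List.getD_eq_getElem _ _ hjN]; exact List.getElem_mem hjN
  have hclen := hcells _ hcellmem
  have hdN : u.2.2.toNat < ((s.getD u.1.toNat []).getD u.2.1.toNat []).length := by omega
  unfold pvGU pvSU
  rw [pvS_eq _ _ hu1 hu3 hu5, pvG_eq _ hx1 hx2 hx3,
    pv_getD3_set3 _ _ _ _ _ _ _ hiN hjN hdN]
  have hiff : (x.1.toNat = u.1.toNat ∧ x.2.1.toNat = u.2.1.toNat ∧
      x.2.2.toNat = u.2.2.toNat) ↔ x = u := by
    rw [Prod.ext_iff, Prod.ext_iff]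
    constructor
    · rintro ⟨a, b, c⟩; exact ⟨by omega, by omega, by omega⟩
    · rintro ⟨a, b, c⟩; exact ⟨by omega, by omega, by omega⟩
  by_cases hx : x = u
  · rw [if_pos (hiff.mpr hx), if_pos hx]
  · rw [if_neg (fun hc => hx (hiff.mp hc)), if_neg hx, pvG_eq _ hx1 hx2 hx3]

theorem pv_lb_G {H W : Int} {s : List (List (List Int))} (hs : pvShape H W s) (hlb : pvLB s)
    {u : Int × Int × Int} (hu : pvInR H W u) : 0 ≤ pvGU s u ∧ pvGU s u ≤ 100 := by
  obtain ⟨hu1, hu2, hu3, hu4, hu5, hu6⟩ := hu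
  obtain ⟨hlen, hrows⟩ := hs
  have hiN : u.1.toNat < s.length := by omega
  have hrowmem : s.getD u.1.toNat [] ∈ s := by
    rw [List.getD_eq_getElem _ _ hiN]; exact List.getElem_mem hiN
  obtain ⟨hrlen, hcells⟩ := hrows _ hrowmem
  have hjN : u.2.1.toNat < (s.getD u.1.toNat []).length := by omega
  have hcellmem : (s.getD u.1.toNat []).getD u.2.1.toNat [] ∈ s.getD u.1.toNat [] := by
    rw [List.getD_eq_getElem _ _ hjN]; exact List.getElem_mem hjN
  have hclen := hcells _ hcellmem
  have hdN : u.2.2.toNat < ((s.getD u.1.toNat []).getD u.2.1.toNat []).length := by omega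
  have hmem : ((s.getD u.1.toNat []).getD u.2.1.toNat []).getD u.2.2.toNat 100 ∈
      (s.getD u.1.toNat []).getD u.2.1.toNat [] := by
    rw [List.getD_eq_getElem _ _ hdN]; exact List.getElem_mem hdN
  rw [pvGU, pvG_eq _ hu1 hu3 hu5]
  exact hlb _ hrowmem _ hcellmem _ hmem

theorem pv_sum_map_set {α : Type} (f : α → Int) (l : List α) (n : Nat) (h : n < l.length)
    (x : α) (dflt : α) :
    ((l.set n x).map f).sum = (l.map f).sum + f x - f (l.getD n dflt) := by
  rw [List.map_set, pv_sum_set _ _ (by simpa using h)]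
  congr 1
  rw [List.getD_eq_getElem _ _ (by simpa using h), List.getElem_map,
    List.getD_eq_getElem _ _ h]

theorem pv_sum_pvS {H W : Int} {s : List (List (List Int))} (hs : pvShape H W s)
    {u : Int × Int × Int} (hu : pvInR H W u) (v : Int) :
    pvSum (pvSU s u v) = pvSum s + v - pvGU s u := by
  obtain ⟨hu1, hu2, hu3, hu4, hu5, hu6⟩ := hu
  obtain ⟨hlen, hrows⟩ := hs
  have hiN : u.1.toNat < s.length := by omega
  have hrowmem : s.getD u.1.toNat [] ∈ s := by
    rw [List.getD_eq_getElem _ _ hiN]; exact List.getElem_mem hiN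
  obtain ⟨hrlen, hcells⟩ := hrows _ hrowmem
  have hjN : u.2.1.toNat < (s.getD u.1.toNat []).length := by omega
  have hcellmem : (s.getD u.1.toNat []).getD u.2.1.toNat [] ∈ s.getD u.1.toNat [] := by
    rw [List.getD_eq_getElem _ _ hjN]; exact List.getElem_mem hjN
  have hclen := hcells _ hcellmem
  have hdN : u.2.2.toNat < ((s.getD u.1.toNat []).getD u.2.1.toNat []).length := by omega
  unfold pvSum pvSU
  rw [pvS_eq _ _ hu1 hu3 hu5, pvGU, pvG_eq _ hu1 hu3 hu5,
    pv_sum_map_set _ _ _ hiN _ []]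
  rw [pv_sum_map_set _ _ _ hjN _ []]
  rw [pv_sum_set _ _ hdN]
  have hgd : ((s.getD u.1.toNat []).getD u.2.1.toNat []).getD u.2.2.toNat 0 =
      ((s.getD u.1.toNat []).getD u.2.1.toNat []).getD u.2.2.toNat 100 := by
    rw [List.getD_eq_getElem _ _ hdN, List.getD_eq_getElem _ _ hdN]
  rw [hgd]
  ring

theorem pv_sum_nonneg {s : List (List (List Int))} (hlb : pvLB s) : 0 ≤ pvSum s := by
  apply List.sum_nonneg
  intro y hy
  obtain ⟨r, hr, rfl⟩ := List.mem_map.mp hy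
  apply List.sum_nonneg
  intro z hz
  obtain ⟨c, hc, rfl⟩ := List.mem_map.mp hz
  apply List.sum_nonneg
  intro x hx
  exact (hlb _ hr _ hc _ hx).1

theorem pv_relax_inv {H W : Int} {grid : List (List String)} {s : List (List (List Int))}
    (hI : pvInv H W grid s) {u v : Int × Int × Int} {w : Int} (hu : pvInR H W u)
    (he : pvEdge H W grid u v w) (hlt : pvGU s u + w < pvGU s v) :
    pvInv H W grid (pvSU s v (pvGU s u + w)) := by
  obtain ⟨hsh, hlb, hach, hseed⟩ := hI
  obtain ⟨hvInR, hw0, hw1, hvne⟩ := pv_edge_target hu he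
  have hub := pv_lb_G hsh hlb hu
  have hvb := pv_lb_G hsh hlb hvInR
  have hval : 0 ≤ pvGU s u + w ∧ pvGU s u + w ≤ 100 := by omega
  refine ⟨pv_shape_pvS hsh hvInR _, pv_lb_pvS hlb _ hval, ?_, ?_⟩
  · intro x hx
    obtain ⟨ha1, ha2, ha3, ha4, ha5, ha6⟩ := hx
    have hx : pvInR H W x := ⟨ha1, ha2, ha3, ha4, ha5, ha6⟩
    rw [pvG_pvS hsh hvInR ha1 ha3 ha5 _]
    by_cases hxv : x = v
    · rw [if_pos hxv]
      right
      subst hxv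
      rcases hach u hu with h100 | hwalk
      · omega
      · exact pvWalk.step u (pvGU s u) x w hwalk he
    · rw [if_neg hxv]
      exact hach x hx
  · intro x c hxc
    have hH : 1 ≤ H := by obtain ⟨a, b, _⟩ := hu; omega
    have hW : 1 ≤ W := by obtain ⟨_, _, a, b, _⟩ := hu; omega
    obtain ⟨ha1, ha2, ha3, ha4, ha5, ha6⟩ := (pv_seeds_inR grid hH hW hxc).1
    rw [pvG_pvS hsh hvInR ha1 ha3 ha5 _]
    by_cases hxv : x = v
    · rw [if_pos hxv]
      subst hxv
      have := hseed x c hxc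
      omega
    · rw [if_neg hxv]
      exact hseed x c hxc

-- ---------- the initial array and the seeds ----------

theorem pv_shape_init (H W : Int) : pvShape H W (pvInit H W) := by
  refine ⟨by simp [pvInit], ?_⟩
  intro r hr
  rw [List.eq_of_mem_replicate hr]
  refine ⟨by simp, ?_⟩
  intro c hc
  rw [List.eq_of_mem_replicate hc]
  simp

theorem pv_lb_init (H W : Int) : pvLB (pvInit H W) := by
  intro r hr
  rw [List.eq_of_mem_replicate hr]
  intro c hc
  rw [List.eq_of_mem_replicate hc]
  intro x hx
  rw [List.eq_of_mem_replicate hx]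
  omega

theorem pvG_init (H W : Int) {x : Int × Int × Int} (hi : 0 ≤ x.1) (hj : 0 ≤ x.2.1)
    (hd : 0 ≤ x.2.2) : pvGU (pvInit H W) x = 100 := by
  rw [pvGU, pvG_eq _ hi hj hd]
  unfold pvInit
  by_cases h1 : x.1.toNat < H.toNat
  · rw [List.getD_replicate _ h1]
    by_cases h2 : x.2.1.toNat < W.toNat
    · rw [List.getD_replicate _ h2]
      by_cases h3 : x.2.2.toNat < 4
      · rw [List.getD_replicate _ h3]
      · rw [List.getD_eq_default _ _ (by rw [List.length_replicate]; omega)]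
    · have hrow : (List.replicate W.toNat (List.replicate 4 (100 : Int))).getD x.2.1.toNat [] =
          ([] : List Int) :=
        List.getD_eq_default _ _ (by rw [List.length_replicate]; omega)
      rw [hrow]
      simp
  · have hrow : (List.replicate H.toNat
        (List.replicate W.toNat (List.replicate 4 (100 : Int)))).getD x.1.toNat [] =
          ([] : List (List Int)) :=
      List.getD_eq_default _ _ (by rw [List.length_replicate]; omega)
    rw [hrow]
    simp

theorem pv_sum_init (H W : Int) :
    pvSum (pvInit H W) = (H.toNat : Int) * ((W.toNat : Int) * 400) := by
  unfold pvSum pvInit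
  simp [List.map_replicate, List.sum_replicate]

theorem pv_baseInR {H W : Int} (hH : 1 ≤ H) (hW : 1 ≤ W) (d : Int) (h1 : 0 ≤ d)
    (h2 : d < 4) : pvInR H W (H - 1, W - 1, d) := by
  refine ⟨?_, ?_, ?_, ?_, ?_, ?_⟩
  · show (0 : Int) ≤ H - 1; omega
  · show H - 1 < H; omega
  · show (0 : Int) ≤ W - 1; omega
  · show W - 1 < W; omega
  · show (0 : Int) ≤ d; omega
  · show d < 4; omega

theorem pv_pySetD_neg_one {α : Type} (xs : List α) (h : 1 ≤ xs.length) (v : α) :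
    PySem.List.pySetD xs (-1) v = xs.set (xs.length - 1) v := by
  have h3 : PySem.List.pyIdx? xs.length (-1) = some (xs.length - 1) := by
    simp only [PySem.List.pyIdx?]
    rw [if_neg (by omega), if_pos (by omega)]
    norm_num
  simp [PySem.List.pySetD, PySem.List.pySet?, h3]

theorem pv_pyGetD_neg_one_eq {α : Type} (xs : List α) (d : α) {L : Int}
    (hL : (xs.length : Int) = L) (h1 : 1 ≤ L) :
    PySem.List.pyGetD xs (-1) d = PySem.List.pyGetD xs (L - 1) d := by
  rw [PySem.List.pyGetD_neg_ofNat xs 1 d (by omega) (by omega),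
    PySem.List.pyGetD_of_nonneg _ _ (by omega : (0 : Int) ≤ L - 1),
    List.getD_eq_getElem _ _ (by omega : (L - 1).toNat < xs.length)]
  congr 1
  omega

theorem pv_pvS_neg {H W : Int} {s : List (List (List Int))} (hs : pvShape H W s)
    (hH : 1 ≤ H) (hW : 1 ≤ W) (d v : Int) :
    pvS s (-1) (-1) d v = pvS s (H - 1) (W - 1) d v := by
  obtain ⟨hlen, hrows⟩ := hs
  have hrow_neg : PySem.List.pyGetD s (-1) [] = PySem.List.pyGetD s (H - 1) [] :=
    pv_pyGetD_neg_one_eq s [] (by omega) hH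
  have hrmem : PySem.List.pyGetD s (H - 1) [] ∈ s :=
    PySem.List.pyGetD_mem _ _ ⟨by omega, by omega⟩
  have hrlen : (PySem.List.pyGetD s (H - 1) []).length = W.toNat := (hrows _ hrmem).1
  have hcell_neg : PySem.List.pyGetD (PySem.List.pyGetD s (H - 1) []) (-1) [] =
      PySem.List.pyGetD (PySem.List.pyGetD s (H - 1) []) (W - 1) [] :=
    pv_pyGetD_neg_one_eq _ [] (by omega) hW
  have hset_inner : ∀ x : List Int,
      PySem.List.pySetD (PySem.List.pyGetD s (H - 1) []) (-1) x =
        PySem.List.pySetD (PySem.List.pyGetD s (H - 1) []) (W - 1) x := by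
    intro x
    rw [pv_pySetD_neg_one _ (by omega) x, pv_pySetD_nonneg _ (by omega : (0:Int) ≤ W - 1) x,
      hrlen]
    congr 1
    omega
  have hset_outer : ∀ x : List (List Int),
      PySem.List.pySetD s (-1) x = PySem.List.pySetD s (H - 1) x := by
    intro x
    rw [pv_pySetD_neg_one _ (by omega) x, pv_pySetD_nonneg _ (by omega : (0:Int) ≤ H - 1) x,
      hlen]
    congr 1
    omega
  unfold pvS
  rw [hrow_neg, hcell_neg, hset_inner, hset_outer]

-- proof-side normal form of A's seeding (indices H-1/W-1 instead of -1)
def pvSeedN (H W : Int) (grid : List (List String)) : List (List (List Int)) :=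
  let s := pvInit H W
  let goal := PySem.List.pyGetD (PySem.List.pyGetD grid (-1) []) (-1) ""
  if goal = "A" then
    pvS (pvS (pvS s (H - 1) (W - 1) 0 0) (H - 1) (W - 1) 1 1) (H - 1) (W - 1) 3 1
  else if goal = "B" then
    pvS (pvS (pvS s (H - 1) (W - 1) 0 1) (H - 1) (W - 1) 1 0) (H - 1) (W - 1) 3 1
  else
    pvS (pvS (pvS s (H - 1) (W - 1) 0 1) (H - 1) (W - 1) 1 1) (H - 1) (W - 1) 3 0

theorem pv_seedA_eq {H W : Int} {grid : List (List String)} (hH : 1 ≤ H) (hW : 1 ≤ W) :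
    pvSeedA H W grid = pvSeedN H W grid := by
  have hs0 := pv_shape_init H W
  have step : ∀ a b c : Int,
      pvS (pvS (pvS (pvInit H W) (-1) (-1) 0 a) (-1) (-1) 1 b) (-1) (-1) 3 c =
        pvS (pvS (pvS (pvInit H W) (H - 1) (W - 1) 0 a) (H - 1) (W - 1) 1 b)
          (H - 1) (W - 1) 3 c := by
    intro a b c
    have hs1 : pvShape H W (pvS (pvInit H W) (H - 1) (W - 1) 0 a) :=
      pv_shape_pvS hs0 (pv_baseInR hH hW 0 (by omega) (by omega)) a
    have hs2 : pvShape H W (pvS (pvS (pvInit H W) (H - 1) (W - 1) 0 a) (H - 1) (W - 1) 1 b) :=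
      pv_shape_pvS hs1 (pv_baseInR hH hW 1 (by omega) (by omega)) b
    rw [pv_pvS_neg hs0 hH hW, pv_pvS_neg hs1 hH hW, pv_pvS_neg hs2 hH hW]
  simp only [pvSeedA, pvSeedN]
  split_ifs <;> apply step

theorem pv_seed_chain {H W : Int} (grid : List (List String)) (hH : 1 ≤ H) (hW : 1 ≤ W)
    (v0 v1 v3 : Int) (hb0 : 0 ≤ v0 ∧ v0 ≤ 1) (hb1 : 0 ≤ v1 ∧ v1 ≤ 1) (hb3 : 0 ≤ v3 ∧ v3 ≤ 1)
    (hseeds : pvSeeds H W grid =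
      [((H - 1, W - 1, 0), v0), ((H - 1, W - 1, 1), v1), ((H - 1, W - 1, 3), v3)]) :
    pvInv H W grid
        (pvS (pvS (pvS (pvInit H W) (H - 1) (W - 1) 0 v0) (H - 1) (W - 1) 1 v1)
          (H - 1) (W - 1) 3 v3) ∧
      (∀ u, pvInR H W u →
        u ∉ [(H - 1, W - 1, (0 : Int)), (H - 1, W - 1, (1 : Int)), (H - 1, W - 1, (3 : Int))] →
        pvGU (pvS (pvS (pvS (pvInit H W) (H - 1) (W - 1) 0 v0) (H - 1) (W - 1) 1 v1)
          (H - 1) (W - 1) 3 v3) u = 100) ∧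
      pvSum (pvS (pvS (pvS (pvInit H W) (H - 1) (W - 1) 0 v0) (H - 1) (W - 1) 1 v1)
          (H - 1) (W - 1) 3 v3) ≤ 400 * H * W := by
  have hu0 := pv_baseInR hH hW 0 (by omega) (by omega)
  have hu1 := pv_baseInR hH hW 1 (by omega) (by omega)
  have hu3 := pv_baseInR hH hW 3 (by omega) (by omega)
  have hs0 := pv_shape_init H W
  have hs1 : pvShape H W (pvSU (pvInit H W) (H - 1, W - 1, 0) v0) := pv_shape_pvS hs0 hu0 v0
  have hs2 : pvShape H W (pvSU (pvSU (pvInit H W) (H - 1, W - 1, 0) v0) (H - 1, W - 1, 1) v1) :=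
    pv_shape_pvS hs1 hu1 v1
  have hs3 : pvShape H W (pvSU (pvSU (pvSU (pvInit H W) (H - 1, W - 1, 0) v0)
      (H - 1, W - 1, 1) v1) (H - 1, W - 1, 3) v3) := pv_shape_pvS hs2 hu3 v3
  have hrw : pvS (pvS (pvS (pvInit H W) (H - 1) (W - 1) 0 v0) (H - 1) (W - 1) 1 v1)
      (H - 1) (W - 1) 3 v3 =
      pvSU (pvSU (pvSU (pvInit H W) (H - 1, W - 1, 0) v0) (H - 1, W - 1, 1) v1)
        (H - 1, W - 1, 3) v3 := rfl
  rw [hrw]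
  have hne01 : ((H - 1, W - 1, (0 : Int)) : Int × Int × Int) ≠ (H - 1, W - 1, 1) := by simp
  have hne03 : ((H - 1, W - 1, (0 : Int)) : Int × Int × Int) ≠ (H - 1, W - 1, 3) := by simp
  have hne13 : ((H - 1, W - 1, (1 : Int)) : Int × Int × Int) ≠ (H - 1, W - 1, 3) := by simp
  have hG : ∀ x : Int × Int × Int, 0 ≤ x.1 → 0 ≤ x.2.1 → 0 ≤ x.2.2 →
      pvGU (pvSU (pvSU (pvSU (pvInit H W) (H - 1, W - 1, 0) v0) (H - 1, W - 1, 1) v1)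
          (H - 1, W - 1, 3) v3) x =
        if x = (H - 1, W - 1, 3) then v3 else if x = (H - 1, W - 1, 1) then v1
        else if x = (H - 1, W - 1, 0) then v0 else 100 := by
    intro x h1 h2 h3
    rw [pvG_pvS hs2 hu3 h1 h2 h3, pvG_pvS hs1 hu1 h1 h2 h3, pvG_pvS hs0 hu0 h1 h2 h3]
    by_cases e3 : x = (H - 1, W - 1, 3)
    · rw [if_pos e3, if_pos e3]
    · rw [if_neg e3, if_neg e3]
      by_cases e1 : x = (H - 1, W - 1, 1)
      · rw [if_pos e1, if_pos e1]
      · rw [if_neg e1, if_neg e1]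
        by_cases e0 : x = (H - 1, W - 1, 0)
        · rw [if_pos e0, if_pos e0]
        · rw [if_neg e0, if_neg e0, pvG_init H W h1 h2 h3]
  have hG0 : pvGU (pvSU (pvSU (pvSU (pvInit H W) (H - 1, W - 1, 0) v0) (H - 1, W - 1, 1) v1)
      (H - 1, W - 1, 3) v3) (H - 1, W - 1, 0) = v0 := by
    rw [hG (H - 1, W - 1, 0) (by dsimp; omega) (by dsimp; omega) (by dsimp; omega),
      if_neg hne03, if_neg hne01, if_pos rfl]
  have hG1 : pvGU (pvSU (pvSU (pvSU (pvInit H W) (H - 1, W - 1, 0) v0) (H - 1, W - 1, 1) v1)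
      (H - 1, W - 1, 3) v3) (H - 1, W - 1, 1) = v1 := by
    rw [hG (H - 1, W - 1, 1) (by dsimp; omega) (by dsimp; omega) (by dsimp; omega),
      if_neg hne13, if_pos rfl]
  have hG3 : pvGU (pvSU (pvSU (pvSU (pvInit H W) (H - 1, W - 1, 0) v0) (H - 1, W - 1, 1) v1)
      (H - 1, W - 1, 3) v3) (H - 1, W - 1, 3) = v3 := by
    rw [hG (H - 1, W - 1, 3) (by dsimp; omega) (by dsimp; omega) (by dsimp; omega), if_pos rfl]
  have hlb3 : pvLB (pvSU (pvSU (pvSU (pvInit H W) (H - 1, W - 1, 0) v0) (H - 1, W - 1, 1) v1)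
      (H - 1, W - 1, 3) v3) :=
    pv_lb_pvS (pv_lb_pvS (pv_lb_pvS (pv_lb_init H W) _ (by omega)) _ (by omega)) _ (by omega)
  refine ⟨⟨hs3, hlb3, ?_, ?_⟩, ?_, ?_⟩
  · -- achievability
    intro u hu
    obtain ⟨h1, h2, h3, h4, h5, h6⟩ := hu
    by_cases e3 : u = (H - 1, W - 1, 3)
    · right
      rw [e3, hG3]
      exact pvWalk.src _ _ (by rw [hseeds]; simp)
    · by_cases e1 : u = (H - 1, W - 1, 1)
      · right
        rw [e1, hG1]
        exact pvWalk.src _ _ (by rw [hseeds]; simp)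
      · by_cases e0 : u = (H - 1, W - 1, 0)
        · right
          rw [e0, hG0]
          exact pvWalk.src _ _ (by rw [hseeds]; simp)
        · left
          rw [hG _ h1 h3 h5, if_neg e3, if_neg e1, if_neg e0]
  · -- seedLe
    intro x c hxc
    rw [hseeds] at hxc
    simp only [List.mem_cons, Prod.mk.injEq, List.not_mem_nil, or_false] at hxc
    rcases hxc with ⟨rfl, rfl⟩ | ⟨rfl, rfl⟩ | ⟨rfl, rfl⟩
    · rw [hG0]
    · rw [hG1]
    · rw [hG3]
  · -- 100 elsewhere
    intro u hu hnotin
    obtain ⟨h1, h2, h3, h4, h5, h6⟩ := hu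
    simp only [List.mem_cons, List.not_mem_nil, or_false, not_or] at hnotin
    rw [hG _ h1 h3 h5, if_neg hnotin.2.2, if_neg hnotin.2.1, if_neg hnotin.1]
  · -- sum bound
    have e1 : pvGU (pvInit H W) (H - 1, W - 1, 0) = 100 :=
      @pvG_init H W (H - 1, W - 1, 0) (by dsimp; omega) (by dsimp; omega) (by dsimp; omega)
    have e2 : pvGU (pvSU (pvInit H W) (H - 1, W - 1, 0) v0) (H - 1, W - 1, 1) = 100 := by
      rw [pvG_pvS hs0 hu0 (x := (H - 1, W - 1, 1)) (by dsimp; omega) (by dsimp; omega)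
          (by dsimp; omega),
        if_neg (Ne.symm hne01), @pvG_init H W (H - 1, W - 1, 1) (by dsimp; omega)
          (by dsimp; omega) (by dsimp; omega)]
    have e3 : pvGU (pvSU (pvSU (pvInit H W) (H - 1, W - 1, 0) v0) (H - 1, W - 1, 1) v1)
        (H - 1, W - 1, 3) = 100 := by
      rw [pvG_pvS hs1 hu1 (x := (H - 1, W - 1, 3)) (by dsimp; omega) (by dsimp; omega)
          (by dsimp; omega),
        if_neg (Ne.symm hne13),
        pvG_pvS hs0 hu0 (x := (H - 1, W - 1, 3)) (by dsimp; omega) (by dsimp; omega)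
          (by dsimp; omega),
        if_neg (Ne.symm hne03), @pvG_init H W (H - 1, W - 1, 3) (by dsimp; omega)
          (by dsimp; omega) (by dsimp; omega)]
    have q1 : pvSum (pvSU (pvInit H W) (H - 1, W - 1, 0) v0) =
        pvSum (pvInit H W) + v0 - 100 := by rw [pv_sum_pvS hs0 hu0, e1]
    have q2 : pvSum (pvSU (pvSU (pvInit H W) (H - 1, W - 1, 0) v0) (H - 1, W - 1, 1) v1) =
        pvSum (pvSU (pvInit H W) (H - 1, W - 1, 0) v0) + v1 - 100 := by
      rw [pv_sum_pvS hs1 hu1, e2]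
    have q3 : pvSum (pvSU (pvSU (pvSU (pvInit H W) (H - 1, W - 1, 0) v0) (H - 1, W - 1, 1) v1)
        (H - 1, W - 1, 3) v3) =
        pvSum (pvSU (pvSU (pvInit H W) (H - 1, W - 1, 0) v0) (H - 1, W - 1, 1) v1) + v3 - 100 := by
      rw [pv_sum_pvS hs2 hu3, e3]
    have hsi := pv_sum_init H W
    have hHt : (H.toNat : Int) = H := Int.toNat_of_nonneg (by omega)
    have hWt : (W.toNat : Int) = W := Int.toNat_of_nonneg (by omega)
    rw [hHt, hWt] at hsi
    show pvSum (pvSU (pvSU (pvSU (pvInit H W) (H - 1, W - 1, 0) v0) (H - 1, W - 1, 1) v1)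
        (H - 1, W - 1, 3) v3) ≤ 400 * H * W
    rw [q3, q2, q1, hsi]
    nlinarith [hb0.2, hb1.2, hb3.2]

theorem pv_seedN_inv {H W : Int} {grid : List (List String)} (hH : 1 ≤ H) (hW : 1 ≤ W) :
    pvInv H W grid (pvSeedN H W grid) ∧
    (∀ u, pvInR H W u → u ∉ [(H - 1, W - 1, (0 : Int)), (H - 1, W - 1, (1 : Int)), (H - 1, W - 1, (3 : Int))] →
      pvGU (pvSeedN H W grid) u = 100) ∧
    pvSum (pvSeedN H W grid) ≤ 400 * H * W := by
  unfold pvSeedN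
  have hseedsEq : ∀ (l : List ((Int × Int × Int) × Int)),
      pvSeedsOf H W (PySem.List.pyGetD (PySem.List.pyGetD grid (-1) []) (-1) "") = l →
      pvSeeds H W grid = l := by
    intro l hl
    rw [pvSeeds, hl]
  by_cases hA : PySem.List.pyGetD (PySem.List.pyGetD grid (-1) []) (-1) "" = "A"
  · rw [if_pos hA]
    exact pv_seed_chain grid hH hW 0 1 1 (by omega) (by omega) (by omega)
      (hseedsEq _ (by rw [pvSeedsOf, if_pos hA]))
  · rw [if_neg hA]
    by_cases hB : PySem.List.pyGetD (PySem.List.pyGetD grid (-1) []) (-1) "" = "B"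
    · rw [if_pos hB]
      exact pv_seed_chain grid hH hW 1 0 1 (by omega) (by omega) (by omega)
        (hseedsEq _ (by rw [pvSeedsOf, if_neg hA, if_pos hB]))
    · rw [if_neg hB]
      exact pv_seed_chain grid hH hW 1 1 0 (by omega) (by omega) (by omega)
        (hseedsEq _ (by rw [pvSeedsOf, if_neg hA, if_neg hB]))


-- ---------- A side: the 0-1 BFS worklist ----------

theorem pv_skip_iff (d nd : Int) (hd0 : 0 ≤ d) (hd4 : d < 4) (hn0 : 0 ≤ nd) (hn4 : nd < 4) :
    (((pvDd d).1 = (pvDd nd).1 ∧ (pvDd d).2 = (pvDd nd).2) ∨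
      ((pvDd d).1 = (pvDd nd).1 ∧ (pvDd d).2 * (-1) = (pvDd nd).2) ∨
      ((pvDd d).2 = (pvDd nd).2 ∧ (pvDd d).1 * (-1) = (pvDd nd).1)) ↔
    ¬(nd ≠ d ∧ PySem.Int.mod (nd + 2) 4 ≠ d) := by
  interval_cases d <;> interval_cases nd <;> decide

theorem pv_turn_spec {H W : Int} {grid : List (List String)} {i j d : Int}
    (hu : pvInR H W (i, j, d)) (nowScore : Int) (nd : Int) (hn0 : 0 ≤ nd) (hn4 : nd < 4)
    (acc : List (List (List Int)) × List (Int × Int × Int)) (hI : pvInv H W grid acc.1)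
    (hGu : pvGU acc.1 (i, j, d) = nowScore) :
    pvInv H W grid (pvTurn i j (pvDd d).1 (pvDd d).2 nowScore acc nd).1 ∧
      pvGU (pvTurn i j (pvDd d).1 (pvDd d).2 nowScore acc nd).1 (i, j, d) = nowScore ∧
      (∀ x, pvInR H W x →
        pvGU (pvTurn i j (pvDd d).1 (pvDd d).2 nowScore acc nd).1 x ≤ pvGU acc.1 x) ∧
      (∀ x, pvInR H W x →
        pvGU (pvTurn i j (pvDd d).1 (pvDd d).2 nowScore acc nd).1 x < pvGU acc.1 x →
        x ∈ (pvTurn i j (pvDd d).1 (pvDd d).2 nowScore acc nd).2) ∧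
      (∀ x ∈ acc.2, x ∈ (pvTurn i j (pvDd d).1 (pvDd d).2 nowScore acc nd).2) ∧
      (∀ x ∈ (pvTurn i j (pvDd d).1 (pvDd d).2 nowScore acc nd).2,
        x ∈ acc.2 ∨ x = (i, j, nd)) ∧
      ((nd ≠ d ∧ PySem.Int.mod (nd + 2) 4 ≠ d) →
        pvGU (pvTurn i j (pvDd d).1 (pvDd d).2 nowScore acc nd).1 (i, j, nd) ≤ nowScore + 1) ∧
      2 * pvSum (pvTurn i j (pvDd d).1 (pvDd d).2 nowScore acc nd).1 +
          ((pvTurn i j (pvDd d).1 (pvDd d).2 nowScore acc nd).2.length : Int) ≤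
        2 * pvSum acc.1 + (acc.2.length : Int) := by
  obtain ⟨hu1, hu2, hu3, hu4, hu5, hu6⟩ := hu
  have hu' : pvInR H W (i, j, d) := ⟨hu1, hu2, hu3, hu4, hu5, hu6⟩
  rcases hE : PySem.List.pyGetD pvDIR nd ((0 : Int), (0 : Int)) with ⟨ndi, ndj⟩
  have hDd : pvDd nd = (ndi, ndj) := hE
  have hiff := pv_skip_iff d nd hu5 hu6 hn0 hn4
  rw [hDd] at hiff
  unfold pvTurn
  rw [hE]
  dsimp only
  by_cases hok : nd ≠ d ∧ PySem.Int.mod (nd + 2) 4 ≠ d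
  · have hno : ¬(((pvDd d).1 = ndi ∧ (pvDd d).2 = ndj) ∨
        ((pvDd d).1 = ndi ∧ (pvDd d).2 * (-1) = ndj) ∨
        ((pvDd d).2 = ndj ∧ (pvDd d).1 * (-1) = ndi)) := fun hc => (hiff.mp hc) hok
    have hC1 : ¬((pvDd d).1 = ndi ∧ (pvDd d).2 = ndj) := fun h => hno (Or.inl h)
    have hC2 : ¬(((pvDd d).1 = ndi ∧ (pvDd d).2 * (-1) = ndj) ∨
        ((pvDd d).2 = ndj ∧ (pvDd d).1 * (-1) = ndi)) := fun h => hno (Or.inr h)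
    rw [if_neg hC1, if_neg hC2]
    by_cases hrel : pvG acc.1 i j nd > nowScore + 1
    · rw [if_pos hrel]
      have hvInR : pvInR H W (i, j, nd) := ⟨hu1, hu2, hu3, hu4, hn0, hn4⟩
      have hedge := pv_edge_turn (H := H) (W := W) grid i j d nd hn0 hn4 hok.1 hok.2
      have hlt : pvGU acc.1 (i, j, d) + 1 < pvGU acc.1 (i, j, nd) := by
        rw [hGu]; exact hrel
      have hI1 := pv_relax_inv hI hu' hedge hlt
      have hupd : pvS acc.1 i j nd (nowScore + 1) =
          pvSU acc.1 (i, j, nd) (pvGU acc.1 (i, j, d) + 1) := by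
        rw [hGu]; rfl
      have hndd : ((i, j, d) : Int × Int × Int) ≠ (i, j, nd) :=
        fun hc => hok.1 (congrArg (fun z : Int × Int × Int => z.2.2) hc).symm
      have hGnew : ∀ x : Int × Int × Int, pvInR H W x →
          pvGU (pvS acc.1 i j nd (nowScore + 1)) x =
            if x = (i, j, nd) then nowScore + 1 else pvGU acc.1 x := by
        intro x hx
        obtain ⟨b1, b2, b3, b4, b5, b6⟩ := hx
        rw [hupd, pvG_pvS hI.shape hvInR b1 b3 b5, hGu]
      have hsum : pvSum (pvS acc.1 i j nd (nowScore + 1)) ≤ pvSum acc.1 - 1 := by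
        rw [hupd, pv_sum_pvS hI.shape hvInR]
        omega
      refine ⟨by rw [hupd]; exact hI1, ?_, ?_, ?_, ?_, ?_, ?_, ?_⟩
      · show pvGU (pvS acc.1 i j nd (nowScore + 1)) (i, j, d) = nowScore
        rw [hGnew _ hu', if_neg hndd]
        exact hGu
      · intro x hx
        show pvGU (pvS acc.1 i j nd (nowScore + 1)) x ≤ pvGU acc.1 x
        rw [hGnew x hx]
        by_cases hxeq : x = (i, j, nd)
        · rw [if_pos hxeq, hxeq]
          omega
        · rw [if_neg hxeq]
      · intro x hx hlt2
        show x ∈ acc.2 ++ [(i, j, nd)]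
        rw [hGnew x hx] at hlt2
        by_cases hxeq : x = (i, j, nd)
        · subst hxeq
          exact List.mem_append_right _ (List.mem_singleton.mpr rfl)
        · rw [if_neg hxeq] at hlt2
          omega
      · intro x hxq
        exact List.mem_append_left _ hxq
      · intro x hxq
        rcases List.mem_append.mp hxq with h | h
        · exact Or.inl h
        · right
          simpa using h
      · intro _
        show pvGU (pvS acc.1 i j nd (nowScore + 1)) (i, j, nd) ≤ nowScore + 1
        rw [hGnew _ hvInR, if_pos rfl]
      · show 2 * pvSum (pvS acc.1 i j nd (nowScore + 1)) +
            (((acc.2 ++ [(i, j, nd)]).length : Nat) : Int) ≤ 2 * pvSum acc.1 + (acc.2.length : Int)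
        simp only [List.length_append, List.length_cons, List.length_nil]
        push_cast
        omega
    · rw [if_neg hrel]
      have hGnd : pvG acc.1 i j nd = pvGU acc.1 (i, j, nd) := rfl
      refine ⟨hI, hGu, fun x _ => le_refl _, fun x _ h2 => absurd h2 (lt_irrefl _),
        fun x hx => hx, fun x hx => Or.inl hx, fun _ => ?_, le_refl _⟩
      rw [← hGnd]
      omega
  · have hdis := hiff.mpr hok
    by_cases hC1 : (pvDd d).1 = ndi ∧ (pvDd d).2 = ndj
    · rw [if_pos hC1]
      exact ⟨hI, hGu, fun x _ => le_refl _, fun x _ h2 => absurd h2 (lt_irrefl _),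
        fun x hx => hx, fun x hx => Or.inl hx, fun h => absurd h hok, le_refl _⟩
    · rw [if_neg hC1, if_pos (by
        rcases hdis with h | h | h
        · exact absurd h hC1
        · exact Or.inl h
        · exact Or.inr h)]
      exact ⟨hI, hGu, fun x _ => le_refl _, fun x _ h2 => absurd h2 (lt_irrefl _),
        fun x hx => hx, fun x hx => Or.inl hx, fun h => absurd h hok, le_refl _⟩

theorem pv_turnFold {H W : Int} {grid : List (List String)} {i j d : Int}
    (hu : pvInR H W (i, j, d)) (nowScore : Int) :
    ∀ (l : List Int) (acc : List (List (List Int)) × List (Int × Int × Int)),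
      (∀ nd ∈ l, 0 ≤ nd ∧ nd < 4) →
      pvInv H W grid acc.1 → pvGU acc.1 (i, j, d) = nowScore →
      pvInv H W grid (l.foldl (pvTurn i j (pvDd d).1 (pvDd d).2 nowScore) acc).1 ∧
      pvGU (l.foldl (pvTurn i j (pvDd d).1 (pvDd d).2 nowScore) acc).1 (i, j, d) = nowScore ∧
      (∀ x, pvInR H W x →
        pvGU (l.foldl (pvTurn i j (pvDd d).1 (pvDd d).2 nowScore) acc).1 x ≤ pvGU acc.1 x) ∧
      (∀ x, pvInR H W x →
        pvGU (l.foldl (pvTurn i j (pvDd d).1 (pvDd d).2 nowScore) acc).1 x < pvGU acc.1 x →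
        x ∈ (l.foldl (pvTurn i j (pvDd d).1 (pvDd d).2 nowScore) acc).2) ∧
      (∀ x ∈ acc.2, x ∈ (l.foldl (pvTurn i j (pvDd d).1 (pvDd d).2 nowScore) acc).2) ∧
      (∀ x ∈ (l.foldl (pvTurn i j (pvDd d).1 (pvDd d).2 nowScore) acc).2,
        x ∈ acc.2 ∨ ∃ nd ∈ l, x = (i, j, nd)) ∧
      (∀ nd ∈ l, nd ≠ d → PySem.Int.mod (nd + 2) 4 ≠ d →
        pvGU (l.foldl (pvTurn i j (pvDd d).1 (pvDd d).2 nowScore) acc).1 (i, j, nd) ≤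
          nowScore + 1) ∧
      2 * pvSum (l.foldl (pvTurn i j (pvDd d).1 (pvDd d).2 nowScore) acc).1 +
          (((l.foldl (pvTurn i j (pvDd d).1 (pvDd d).2 nowScore) acc).2.length : Nat) : Int) ≤
        2 * pvSum acc.1 + ((acc.2.length : Nat) : Int) := by
  intro l
  induction l with
  | nil =>
    intro acc _ hI hGu
    exact ⟨hI, hGu, fun x _ => le_refl _, fun x _ h2 => absurd h2 (lt_irrefl _),
      fun x hx => hx, fun x hx => Or.inl hx, by simp, le_refl _⟩
  | cons nd t ih =>
    intro acc hbs hI hGu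
    obtain ⟨hn0, hn4⟩ := hbs nd List.mem_cons_self
    obtain ⟨s1, s2, s3, s4, s5, s6, s7, s8⟩ := pv_turn_spec hu nowScore nd hn0 hn4 acc hI hGu
    simp only [List.foldl_cons]
    obtain ⟨r1, r2, r3, r4, r5, r6, r7, r8⟩ :=
      ih (pvTurn i j (pvDd d).1 (pvDd d).2 nowScore acc nd)
        (fun x hx => hbs x (List.mem_cons_of_mem _ hx)) s1 s2
    refine ⟨r1, r2, ?_, ?_, ?_, ?_, ?_, ?_⟩
    · intro x hx
      exact le_trans (r3 x hx) (s3 x hx)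
    · intro x hx hlt
      by_cases hmid : pvGU (t.foldl (pvTurn i j (pvDd d).1 (pvDd d).2 nowScore)
          (pvTurn i j (pvDd d).1 (pvDd d).2 nowScore acc nd)).1 x <
          pvGU (pvTurn i j (pvDd d).1 (pvDd d).2 nowScore acc nd).1 x
      · exact r4 x hx hmid
      · have : pvGU (pvTurn i j (pvDd d).1 (pvDd d).2 nowScore acc nd).1 x < pvGU acc.1 x := by
          have := r3 x hx
          omega
        exact r5 _ (s4 x hx this)
    · intro x hx
      exact r5 _ (s5 x hx)
    · intro x hx
      rcases r6 x hx with h | h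
      · rcases s6 x h with h2 | h2
        · exact Or.inl h2
        · exact Or.inr ⟨nd, List.mem_cons_self, h2⟩
      · obtain ⟨nd', hnd', hx'⟩ := h
        exact Or.inr ⟨nd', List.mem_cons_of_mem _ hnd', hx'⟩
    · intro nd' hnd' hne hmod
      rcases List.mem_cons.mp hnd' with rfl | hmem
      · have hInRnd : pvInR H W (i, j, nd') := by
          obtain ⟨a1, a2, a3, a4, _, _⟩ := hu
          exact ⟨a1, a2, a3, a4, hn0, hn4⟩
        have := r3 (i, j, nd') hInRnd
        have := s7 ⟨hne, hmod⟩
        omega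
      · exact r7 nd' hmem hne hmod
    · omega

-- worklist invariant: every state is either fully relaxed or still queued
def pvPend (H W : Int) (grid : List (List String)) (s : List (List (List Int)))
    (q : List (Int × Int × Int)) : Prop :=
  ∀ u, pvInR H W u →
    (∀ v w, pvEdge H W grid u v w → pvGU s v ≤ pvGU s u + w) ∨ u ∈ q

structure pvInvA (H W : Int) (grid : List (List String)) (s : List (List (List Int)))
    (q : List (Int × Int × Int)) : Prop where
  inv : pvInv H W grid s
  qInR : ∀ u ∈ q, pvInR H W u
  pend : pvPend H W grid s q

theorem pv_stepA_spec {H W : Int} {grid : List (List String)} {s : List (List (List Int))}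
    {i j nowD : Int} {rest : List (Int × Int × Int)}
    (h : pvInvA H W grid s ((i, j, nowD) :: rest)) :
    pvInvA H W grid (pvStepA H W grid s i j nowD rest).1 (pvStepA H W grid s i j nowD rest).2 ∧
      2 * pvSum (pvStepA H W grid s i j nowD rest).1 +
          (((pvStepA H W grid s i j nowD rest).2.length : Nat) : Int) <
        2 * pvSum s + (((rest.length : Nat) : Int) + 1) := by
  obtain ⟨hI, hqInR, hpend⟩ := h
  have hu : pvInR H W (i, j, nowD) := hqInR _ List.mem_cons_self
  have hrange : ∀ nd ∈ PySem.List.pyRange 0 4 1, 0 ≤ nd ∧ nd < 4 := by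
    intro nd hnd
    exact PySem.List.mem_pyRange_one.mp hnd
  have hGu0 : pvGU s (i, j, nowD) = pvG s i j nowD := rfl
  obtain ⟨f1, f2, f3, f4, f5, f6, f7, f8⟩ :=
    pv_turnFold (grid := grid) hu (pvG s i j nowD) (PySem.List.pyRange 0 4 1) (s, rest)
      hrange hI hGu0
  rcases hE : PySem.List.pyGetD pvDIR nowD ((0 : Int), (0 : Int)) with ⟨ldi, ldj⟩
  have hDd : pvDd nowD = (ldi, ldj) := hE
  rw [hDd] at f1 f2 f3 f4 f5 f6 f7 f8
  dsimp only at f3 f4 f5 f6 f8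
  unfold pvStepA
  rw [hE]
  dsimp only
  set sq := (PySem.List.pyRange 0 4 1).foldl (pvTurn i j ldi ldj (pvG s i j nowD)) (s, rest)
    with hsq
  -- queue membership facts
  have hsqInR : ∀ x ∈ sq.2, pvInR H W x := by
    intro x hx
    rcases f6 x hx with h | ⟨nd, hnd, rfl⟩
    · exact hqInR _ (List.mem_cons_of_mem _ h)
    · obtain ⟨hb0, hb4⟩ := hrange nd hnd
      obtain ⟨a1, a2, a3, a4, _, _⟩ := hu
      exact ⟨a1, a2, a3, a4, hb0, hb4⟩
  -- all turn edges out of (i, j, nowD) are relaxed in sq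
  have hturnRel : ∀ v w, pvEdge H W grid (i, j, nowD) v w → w = 1 →
      pvGU sq.1 v ≤ pvGU sq.1 (i, j, nowD) + w := by
    intro v w he hw
    rcases he with ⟨_, hv1, hv2, hd0, hd4, hdne, hmod⟩ | ⟨hw0, _⟩
    · have hvnd : v = (i, j, v.2.2) := by
        rw [Prod.ext_iff, Prod.ext_iff]
        exact ⟨hv1, hv2, rfl⟩
      have hmem : v.2.2 ∈ PySem.List.pyRange 0 4 1 := PySem.List.mem_pyRange_one.mpr ⟨hd0, hd4⟩
      have h5 := f7 v.2.2 hmem hdne hmod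
      rw [← hvnd] at h5
      rw [f2, hw]
      exact h5
    · omega
  by_cases hcnd : 0 ≤ i + -ldi ∧ i + -ldi < H ∧ 0 ≤ j + -ldj ∧ j + -ldj < W
  · rw [if_pos hcnd]
    have hsub1 : i - ldi = i + -ldi := by ring
    have hsub2 : j - ldj = j + -ldj := by ring
    have hMv : pvMove H W grid i j nowD = some (i + -ldi, j + -ldj,
        (if PySem.List.pyGetD (PySem.List.pyGetD grid (i + -ldi) []) (j + -ldj) "" = "A" then nowD
         else if PySem.List.pyGetD (PySem.List.pyGetD grid (i + -ldi) []) (j + -ldj) "" = "B" then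
           ((PySem.List.index? pvDIR (ldj, ldi)).getD 0 : Nat)
         else ((PySem.List.index? pvDIR (-ldj, -ldi)).getD 0 : Nat))) := by
      unfold pvMove
      rw [hDd]
      dsimp only
      rw [hsub1, hsub2, if_pos hcnd]
    set nextD : Int :=
      (if PySem.List.pyGetD (PySem.List.pyGetD grid (i + -ldi) []) (j + -ldj) "" = "A" then nowD
       else if PySem.List.pyGetD (PySem.List.pyGetD grid (i + -ldi) []) (j + -ldj) "" = "B" then
         ((PySem.List.index? pvDIR (ldj, ldi)).getD 0 : Nat)
       else ((PySem.List.index? pvDIR (-ldj, -ldi)).getD 0 : Nat)) with hnextD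
    have hedge : pvEdge H W grid (i, j, nowD) (i + -ldi, j + -ldj, nextD) 0 :=
      pv_edge_move grid i j nowD hMv
    obtain ⟨hvInR, hvne2⟩ := pv_move_target hu.2.2.2.2.1 hu.2.2.2.2.2 hMv
    have hvne : ((i + -ldi, j + -ldj, nextD) : Int × Int × Int) ≠ (i, j, nowD) := by
      intro hc
      simp only [Prod.mk.injEq] at hc
      exact hvne2 (by simp only [Prod.mk.injEq]; exact ⟨hc.1, hc.2.1⟩)
    have hGv : pvG sq.1 (i + -ldi) (j + -ldj) nextD = pvGU sq.1 (i + -ldi, j + -ldj, nextD) := rfl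
    by_cases hrel : pvG sq.1 (i + -ldi) (j + -ldj) nextD > pvG s i j nowD
    · rw [if_pos hrel]
      dsimp only
      have hlt : pvGU sq.1 (i, j, nowD) + 0 < pvGU sq.1 (i + -ldi, j + -ldj, nextD) := by
        rw [f2, ← hGv]
        omega
      have hI2 := pv_relax_inv f1 hu hedge hlt
      have hupd : pvS sq.1 (i + -ldi) (j + -ldj) nextD (pvG s i j nowD) =
          pvSU sq.1 (i + -ldi, j + -ldj, nextD) (pvGU sq.1 (i, j, nowD) + 0) := by
        rw [f2]
        show pvS sq.1 (i + -ldi) (j + -ldj) nextD (pvG s i j nowD) =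
          pvS sq.1 (i + -ldi) (j + -ldj) nextD (pvG s i j nowD + 0)
        rw [add_zero]
      have hGnew : ∀ x : Int × Int × Int, pvInR H W x →
          pvGU (pvS sq.1 (i + -ldi) (j + -ldj) nextD (pvG s i j nowD)) x =
            if x = (i + -ldi, j + -ldj, nextD) then pvG s i j nowD else pvGU sq.1 x := by
        intro x hx
        obtain ⟨b1, b2, b3, b4, b5, b6⟩ := hx
        have := pvG_pvS f1.shape hvInR b1 b3 b5 (pvGU sq.1 (i, j, nowD) + 0)
        rw [← hupd] at this
        rw [this, f2, add_zero]
      refine ⟨⟨by rw [hupd]; exact hI2, ?_, ?_⟩, ?_⟩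
      · -- queue InR
        intro x hx
        rcases List.mem_cons.mp hx with rfl | hx2
        · exact hvInR
        · exact hsqInR _ hx2
      · -- pend
        intro x hx
        rcases hpend x hx with hrelx | hqx
        · -- x was fully relaxed in s
          by_cases hdec : pvGU (pvS sq.1 (i + -ldi) (j + -ldj) nextD (pvG s i j nowD)) x
              < pvGU s x
          · right
            by_cases hdec2 : pvGU sq.1 x < pvGU s x
            · exact List.mem_cons_of_mem _ (f4 x hx hdec2)
            · have hx' : pvGU (pvS sq.1 (i + -ldi) (j + -ldj) nextD (pvG s i j nowD)) x
                  < pvGU sq.1 x := by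
                have := f3 x hx
                omega
              rw [hGnew x hx] at hx'
              by_cases hxe : x = (i + -ldi, j + -ldj, nextD)
              · rw [hxe]
                exact List.mem_cons_self
              · rw [if_neg hxe] at hx'
                omega
          · left
            intro v w he
            obtain ⟨hvInR', hw0, _, _⟩ := pv_edge_target hx he
            have h1 := hrelx v w he
            have h2 := f3 v hvInR'
            have h3 : pvGU (pvS sq.1 (i + -ldi) (j + -ldj) nextD (pvG s i j nowD)) v ≤
                pvGU sq.1 v := by
              rw [hGnew v hvInR']
              by_cases hxe : v = (i + -ldi, j + -ldj, nextD)
              · rw [if_pos hxe, hxe, ← hGv]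
                omega
              · rw [if_neg hxe]
            have h4 := f3 x hx
            omega
        · rcases List.mem_cons.mp hqx with rfl | hx2
          · -- x is the popped state: all its edges are relaxed now
            left
            intro v w he
            have hGux : pvGU (pvS sq.1 (i + -ldi) (j + -ldj) nextD (pvG s i j nowD))
                (i, j, nowD) = pvG s i j nowD := by
              rw [hGnew _ hu, if_neg (by intro hc; exact hvne hc.symm), f2]
            rcases he with ⟨hw, hv1, hv2, hd0, hd4, hdne, hmod⟩ | ⟨hw0, hMv2⟩
            · have he' : pvEdge H W grid (i, j, nowD) v w :=
                Or.inl ⟨hw, hv1, hv2, hd0, hd4, hdne, hmod⟩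
              obtain ⟨hvInR', _, _, _⟩ := pv_edge_target hu he'
              have := hturnRel v w he' hw
              have h3 : pvGU (pvS sq.1 (i + -ldi) (j + -ldj) nextD (pvG s i j nowD)) v ≤
                  pvGU sq.1 v := by
                rw [hGnew v hvInR']
                by_cases hxe : v = (i + -ldi, j + -ldj, nextD)
                · rw [if_pos hxe, hxe, ← hGv]
                  omega
                · rw [if_neg hxe]
              rw [hGux]
              rw [f2] at this
              omega
            · rw [hMv] at hMv2
              cases hMv2
              rw [hGux, hGnew _ hvInR, if_pos rfl]
              omega
          · right
            exact List.mem_cons_of_mem _ (f5 x hx2)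
      · -- measure
        have hsum : pvSum (pvS sq.1 (i + -ldi) (j + -ldj) nextD (pvG s i j nowD)) ≤
            pvSum sq.1 - 1 := by
          rw [hupd, pv_sum_pvS f1.shape hvInR, f2]
          rw [hGv] at hrel
          omega
        have hlen : (((i + -ldi, j + -ldj, nextD) :: sq.2).length : Int) =
            (sq.2.length : Int) + 1 := by
          simp
        rw [hlen]
        omega
    · rw [if_neg hrel]
      refine ⟨⟨f1, hsqInR, ?_⟩, ?_⟩
      · intro x hx
        rcases hpend x hx with hrelx | hqx
        · by_cases hdec : pvGU sq.1 x < pvGU s x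
          · exact Or.inr (f4 x hx hdec)
          · left
            intro v w he
            obtain ⟨hvInR', _, _, _⟩ := pv_edge_target hx he
            have h1 := hrelx v w he
            have h2 := f3 v hvInR'
            have h4 := f3 x hx
            omega
        · rcases List.mem_cons.mp hqx with rfl | hx2
          · left
            intro v w he
            rcases he with ⟨hw, hv1, hv2, hd0, hd4, hdne, hmod⟩ | ⟨hw0, hMv2⟩
            · exact hturnRel v w (Or.inl ⟨hw, hv1, hv2, hd0, hd4, hdne, hmod⟩) hw
            · rw [hMv] at hMv2
              cases hMv2
              rw [f2, ← hGv]
              omega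
          · exact Or.inr (f5 x hx2)
      · omega
  · rw [if_neg hcnd]
    have hMnone : pvMove H W grid i j nowD = none := by
      unfold pvMove
      rw [hDd]
      dsimp only
      rw [if_neg (by rw [show i - ldi = i + -ldi from by ring,
        show j - ldj = j + -ldj from by ring]; exact hcnd)]
    refine ⟨⟨f1, hsqInR, ?_⟩, ?_⟩
    · intro x hx
      rcases hpend x hx with hrelx | hqx
      · by_cases hdec : pvGU sq.1 x < pvGU s x
        · exact Or.inr (f4 x hx hdec)
        · left
          intro v w he
          obtain ⟨hvInR', _, _, _⟩ := pv_edge_target hx he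
          have h1 := hrelx v w he
          have h2 := f3 v hvInR'
          have h4 := f3 x hx
          omega
      · rcases List.mem_cons.mp hqx with rfl | hx2
        · left
          intro v w he
          rcases he with ⟨hw, hv1, hv2, hd0, hd4, hdne, hmod⟩ | ⟨hw0, hMv2⟩
          · exact hturnRel v w (Or.inl ⟨hw, hv1, hv2, hd0, hd4, hdne, hmod⟩) hw
          · rw [hMnone] at hMv2
            exact absurd hMv2 (by simp)
        · exact Or.inr (f5 x hx2)
    · omega

theorem pv_loopA_spec {H W : Int} {grid : List (List String)} :
    ∀ (n : Nat) (s : List (List (List Int))) (q : List (Int × Int × Int)),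
      pvInvA H W grid s q → 2 * pvSum s + ((q.length : Nat) : Int) < (n : Int) →
      pvInv H W grid (pvLoopA H W grid n s q) ∧
        pvConsF H W grid (pvGU (pvLoopA H W grid n s q)) := by
  intro n
  induction n with
  | zero =>
    intro s q hI hlt
    have := pv_sum_nonneg hI.inv.lb
    simp at hlt
    omega
  | succ n ih =>
    intro s q hI hlt
    match q with
    | [] =>
      simp only [pvLoopA]
      refine ⟨hI.inv, ?_⟩
      intro u hu v w he
      rcases hI.pend u hu with hrel | hmem
      · exact hrel v w he
      · exact absurd hmem (List.not_mem_nil)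
    | (i, j, nowD) :: rest =>
      obtain ⟨hIA, hmeas⟩ := pv_stepA_spec hI
      simp only [pvLoopA]
      apply ih _ _ hIA
      simp only [List.length_cons] at hlt
      push_cast at hlt hmeas ⊢
      omega


-- ---------- B side: the flat distance array ----------

def pvEnc (W : Int) (u : Int × Int × Int) : Int := (u.1 * W + u.2.1) * 4 + u.2.2

def pvFB (W : Int) (s : List Int) (u : Int × Int × Int) : Int :=
  s.getD (pvEnc W u).toNat 100

theorem pv_enc_bounds {H W : Int} {u : Int × Int × Int} (hu : pvInR H W u) :
    0 ≤ pvEnc W u ∧ pvEnc W u < 4 * H * W := by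
  obtain ⟨h1, h2, h3, h4, h5, h6⟩ := hu
  have ha0 : 0 ≤ u.1 * W := mul_nonneg h1 (by omega)
  have ha1 : u.1 * W + u.2.1 < H * W := by
    have hle : (u.1 + 1) * W ≤ H * W := mul_le_mul_of_nonneg_right (by omega) (by omega)
    have he : (u.1 + 1) * W = u.1 * W + W := by ring
    omega
  have h4hw : 4 * H * W = 4 * (H * W) := by ring
  unfold pvEnc
  rw [h4hw]
  omega

theorem pv_rect_inj {W i1 j1 i2 j2 : Int} (hW : 0 < W) (hj1 : 0 ≤ j1) (hj1' : j1 < W)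
    (hj2 : 0 ≤ j2) (hj2' : j2 < W) (h : i1 * W + j1 = i2 * W + j2) : i1 = i2 ∧ j1 = j2 := by
  have h1 : (i1 * W + j1) / W = i1 := by
    rw [add_comm, Int.add_mul_ediv_right _ _ (by omega : W ≠ 0),
      Int.ediv_eq_zero_of_lt hj1 hj1', zero_add]
  have h2 : (i2 * W + j2) / W = i2 := by
    rw [add_comm, Int.add_mul_ediv_right _ _ (by omega : W ≠ 0),
      Int.ediv_eq_zero_of_lt hj2 hj2', zero_add]
  rw [h] at h1
  have hi : i1 = i2 := by rw [← h1, h2]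
  refine ⟨hi, ?_⟩
  rw [hi] at h
  omega

theorem pv_enc_inj {H W : Int} {u v : Int × Int × Int} (hu : pvInR H W u) (hv : pvInR H W v)
    (h : pvEnc W u = pvEnc W v) : u = v := by
  obtain ⟨hu1, hu2, hu3, hu4, hu5, hu6⟩ := hu
  obtain ⟨hv1, hv2, hv3, hv4, hv5, hv6⟩ := hv
  unfold pvEnc at h
  have hd : u.2.2 = v.2.2 := by omega
  have hij : u.1 * W + u.2.1 = v.1 * W + v.2.1 := by omega
  obtain ⟨hi, hj⟩ := pv_rect_inj (by omega) hu3 hu4 hv3 hv4 hij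
  rw [Prod.ext_iff, Prod.ext_iff]
  exact ⟨hi, hj, hd⟩

structure pvInvB (H W : Int) (grid : List (List String)) (s : List Int) : Prop where
  len : s.length = (4 * H * W).toNat
  lb : ∀ x ∈ s, 0 ≤ x ∧ x ≤ 100
  ach : pvAchF H W grid (pvFB W s)
  seedLe : pvSeedLeF H W grid (pvFB W s)

theorem pv_FB_bnd {H W : Int} {grid : List (List String)} {s : List Int}
    (hI : pvInvB H W grid s) : pvBndF H W (pvFB W s) := by
  intro u hu
  have hb := pv_enc_bounds hu
  have hidx : (pvEnc W u).toNat < s.length := by rw [hI.len]; omega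
  have hmem : s.getD (pvEnc W u).toNat 100 ∈ s := by
    rw [List.getD_eq_getElem _ _ hidx]; exact List.getElem_mem hidx
  exact hI.lb _ hmem

theorem pv_FB_set {H W : Int} {s : List Int} (hlen : s.length = (4 * H * W).toNat)
    {u v : Int × Int × Int} (hu : pvInR H W u) (hv : pvInR H W v) (x : Int) :
    pvFB W (s.set (pvEnc W v).toNat x) u = if u = v then x else pvFB W s u := by
  have hbu := pv_enc_bounds hu
  have hbv := pv_enc_bounds hv
  unfold pvFB
  rw [pv_getD_set]
  by_cases he : u = v
  · rw [if_pos he, if_pos ⟨by rw [he], by rw [hlen]; omega⟩]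
  · rw [if_neg he, if_neg ?_]
    intro hc
    apply he
    apply pv_enc_inj hu hv
    omega

theorem pv_relaxB_inv {H W : Int} {grid : List (List String)} {s : List Int}
    (hI : pvInvB H W grid s) {u v : Int × Int × Int} {w : Int} (hu : pvInR H W u)
    (he : pvEdge H W grid u v w) (hlt : pvFB W s u + w < pvFB W s v) :
    pvInvB H W grid (s.set (pvEnc W v).toNat (pvFB W s u + w)) := by
  obtain ⟨hvInR, hw0, hw1, hvne⟩ := pv_edge_target hu he
  have hub := pv_FB_bnd hI u hu
  have hvb := pv_FB_bnd hI v hvInR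
  refine ⟨by rw [List.length_set]; exact hI.len, ?_, ?_, ?_⟩
  · intro x hx
    rcases List.mem_or_eq_of_mem_set hx with h | rfl
    · exact hI.lb _ h
    · omega
  · intro x hx
    rw [pv_FB_set hI.len hx hvInR]
    by_cases hxv : x = v
    · rw [if_pos hxv]
      right
      subst hxv
      rcases hI.ach u hu with h100 | hwalk
      · omega
      · exact pvWalk.step u (pvFB W s u) x w hwalk he
    · rw [if_neg hxv]
      exact hI.ach x hx
  · intro x c hxc
    have hH : 1 ≤ H := by obtain ⟨a, b, _⟩ := hu; omega
    have hW : 1 ≤ W := by obtain ⟨_, _, a, b, _⟩ := hu; omega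
    have hxInR := (pv_seeds_inR grid hH hW hxc).1
    rw [pv_FB_set hI.len hxInR hvInR]
    by_cases hxv : x = v
    · rw [if_pos hxv]
      subst hxv
      have := hI.seedLe x c hxc
      omega
    · rw [if_neg hxv]
      exact hI.seedLe x c hxc

-- one relaxation attempt (the clean form of B's inner if)
def pvTryB (W : Int) (acc : List Int × Bool) (v : Int × Int × Int) (val : Int) :
    List Int × Bool :=
  if pvFB W acc.1 v > val then (acc.1.set (pvEnc W v).toNat val, true) else acc

theorem pv_tryB_spec {H W : Int} {grid : List (List String)} (acc : List Int × Bool)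
    {u v : Int × Int × Int} {w base val : Int}
    (hI : pvInvB H W grid acc.1) (hu : pvInR H W u) (he : pvEdge H W grid u v w)
    (hb : pvFB W acc.1 u = base) (hval : val = base + w) :
    pvInvB H W grid (pvTryB W acc v val).1 ∧
    pvFB W (pvTryB W acc v val).1 u = base ∧
    (∀ x, pvInR H W x → pvFB W (pvTryB W acc v val).1 x ≤ pvFB W acc.1 x) ∧
    pvFB W (pvTryB W acc v val).1 v ≤ base + w ∧
    (pvTryB W acc v val = acc ∨
      ((pvTryB W acc v val).1.sum < acc.1.sum ∧ (pvTryB W acc v val).2 = true)) := by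
  subst hval
  obtain ⟨hvInR, hw0, hw1, hvne⟩ := pv_edge_target hu he
  have hub := pv_FB_bnd hI u hu
  have hvb := pv_FB_bnd hI v hvInR
  unfold pvTryB
  by_cases hc : pvFB W acc.1 v > base + w
  · rw [if_pos hc]
    dsimp only
    refine ⟨?_, ?_, ?_, ?_, Or.inr ⟨?_, rfl⟩⟩
    · have hres := pv_relaxB_inv hI hu he (by omega)
      rw [hb] at hres
      exact hres
    · rw [pv_FB_set hI.len hu hvInR, if_neg (fun hh => hvne hh.symm)]
      exact hb
    · intro x hx
      rw [pv_FB_set hI.len hx hvInR]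
      by_cases hxv : x = v
      · rw [if_pos hxv, hxv]
        omega
      · rw [if_neg hxv]
    · rw [pv_FB_set hI.len hvInR hvInR, if_pos rfl]
    · have hbv := pv_enc_bounds hvInR
      have hidx : (pvEnc W v).toNat < acc.1.length := by rw [hI.len]; omega
      rw [pv_sum_set _ _ hidx]
      have hgd : acc.1.getD (pvEnc W v).toNat 0 = pvFB W acc.1 v := by
        unfold pvFB
        rw [List.getD_eq_getElem _ _ hidx, List.getD_eq_getElem _ _ hidx]
      rw [hgd]
      omega
  · rw [if_neg hc]
    exact ⟨hI, hb, fun x _ => le_refl _, by omega, Or.inl rfl⟩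

-- the two weight-1 turn targets of direction d are exactly (d+1)%4 and (d+3)%4
theorem pv_turns_cover (d : Int) (h0 : 0 ≤ d) (h4 : d < 4) (nd : Int) :
    (0 ≤ nd ∧ nd < 4 ∧ nd ≠ d ∧ PySem.Int.mod (nd + 2) 4 ≠ d) ↔
      (nd = PySem.Int.mod (d + 1) 4 ∨ nd = PySem.Int.mod (d + 3) 4) := by
  constructor
  · rintro ⟨a, b, c, e⟩
    interval_cases d <;> interval_cases nd <;> revert c e <;> decide
  · rintro (rfl | rfl) <;> interval_cases d <;> exact (by decide)

-- port B's tables agree with port A's DIR reads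
theorem pv_move_portB (d : Int) (h0 : 0 ≤ d) (h4 : d < 4) :
    (pvDd d).1 = PySem.List.pyGetD pvDI d 0 ∧ (pvDd d).2 = PySem.List.pyGetD pvDJ d 0 ∧
    (((PySem.List.index? pvDIR ((pvDd d).2, (pvDd d).1)).getD 0 : Nat) : Int) =
      PySem.List.pyGetD pvRB d 0 ∧
    (((PySem.List.index? pvDIR (-(pvDd d).2, -(pvDd d).1)).getD 0 : Nat) : Int) =
      PySem.List.pyGetD pvRO d 0 := by
  interval_cases d <;> exact (by decide)

def pvNdC (grid : List (List String)) (i j d : Int) : Int :=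
  if PySem.List.pyGetD (PySem.List.pyGetD grid (i - (pvDd d).1) []) (j - (pvDd d).2) "" = "A"
    then d
  else if PySem.List.pyGetD (PySem.List.pyGetD grid (i - (pvDd d).1) []) (j - (pvDd d).2) "" = "B"
    then ((PySem.List.index? pvDIR ((pvDd d).2, (pvDd d).1)).getD 0 : Nat)
  else ((PySem.List.index? pvDIR (-(pvDd d).2, -(pvDd d).1)).getD 0 : Nat)

theorem pv_move_eq (H W : Int) (grid : List (List String)) (i j d : Int) :
    pvMove H W grid i j d =
      if 0 ≤ i - (pvDd d).1 ∧ i - (pvDd d).1 < H ∧ 0 ≤ j - (pvDd d).2 ∧ j - (pvDd d).2 < W then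
        some (i - (pvDd d).1, j - (pvDd d).2, pvNdC grid i j d)
      else none := rfl

-- B's relax body in clean form
def pvRelaxC (H W : Int) (grid : List (List String)) (a : List Int × Bool) (i j d : Int) :
    List Int × Bool :=
  let base := pvFB W a.1 (i, j, d)
  let a2 := pvTryB W (pvTryB W a (i, j, PySem.Int.mod (d + 1) 4) (base + 1))
    (i, j, PySem.Int.mod (d + 3) 4) (base + 1)
  if 0 ≤ i - (pvDd d).1 ∧ i - (pvDd d).1 < H ∧ 0 ≤ j - (pvDd d).2 ∧ j - (pvDd d).2 < W then
    pvTryB W a2 (i - (pvDd d).1, j - (pvDd d).2, pvNdC grid i j d) base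
  else a2

theorem pv_relaxB_eq {H W : Int} {grid : List (List String)} {a : List Int × Bool}
    {i j d : Int} (hu : pvInR H W (i, j, d)) :
    pvRelaxB H W grid a i j d = pvRelaxC H W grid a i j d := by
  have h1 : 0 ≤ i := hu.1
  have h2 : i < H := hu.2.1
  have h3 : 0 ≤ j := hu.2.2.1
  have h4 : j < W := hu.2.2.2.1
  have h5 : 0 ≤ d := hu.2.2.2.2.1
  have h6 : d < 4 := hu.2.2.2.2.2
  obtain ⟨hDI, hDJ, hRB, hRO⟩ := pv_move_portB d h5 h6
  have hiW : 0 ≤ i * W := mul_nonneg h1 (by omega)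
  have e0 : (0 : Int) ≤ (i * W + j) * 4 + d := by omega
  have hm1 : 0 ≤ PySem.Int.mod (d + 1) 4 := PySem.Int.mod_nonneg _ (by omega)
  have hm3 : 0 ≤ PySem.Int.mod (d + 3) 4 := PySem.Int.mod_nonneg _ (by omega)
  have e1 : (0 : Int) ≤ (i * W + j) * 4 + PySem.Int.mod (d + 1) 4 := by omega
  have e3 : (0 : Int) ≤ (i * W + j) * 4 + PySem.Int.mod (d + 3) 4 := by omega
  have hndc : pvNdC grid i j d =
      (if PySem.List.pyGetD (PySem.List.pyGetD grid (i - (pvDd d).1) []) (j - (pvDd d).2) ""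
          = "A" then d
       else if PySem.List.pyGetD (PySem.List.pyGetD grid (i - (pvDd d).1) []) (j - (pvDd d).2) ""
          = "B" then ((PySem.List.index? pvDIR ((pvDd d).2, (pvDd d).1)).getD 0 : Nat)
       else ((PySem.List.index? pvDIR (-(pvDd d).2, -(pvDd d).1)).getD 0 : Nat)) := rfl
  have hnd0 : 0 ≤ pvNdC grid i j d := by
    unfold pvNdC
    split_ifs
    · exact h5
    · exact Int.natCast_nonneg _
    · exact Int.natCast_nonneg _
  unfold pvRelaxB pvRelaxC pvTryB pvFB pvEnc
  simp only [List.foldl_cons, List.foldl_nil]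
  rw [← hDI, ← hDJ, ← hRB, ← hRO, ← hndc]
  rw [PySem.List.pyGetD_of_nonneg _ _ e0, PySem.List.pyGetD_of_nonneg _ _ e1,
    pv_pySetD_nonneg _ e1, PySem.List.pyGetD_of_nonneg _ _ e3, pv_pySetD_nonneg _ e3]
  by_cases hcnd : 0 ≤ i - (pvDd d).1 ∧ i - (pvDd d).1 < H ∧ 0 ≤ j - (pvDd d).2 ∧
      j - (pvDd d).2 < W
  · rw [if_pos hcnd, if_pos hcnd]
    have hniW : 0 ≤ (i - (pvDd d).1) * W := mul_nonneg (by omega) (by omega)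
    have eM : (0 : Int) ≤ ((i - (pvDd d).1) * W + (j - (pvDd d).2)) * 4 + pvNdC grid i j d := by
      omega
    rw [PySem.List.pyGetD_of_nonneg _ _ eM, pv_pySetD_nonneg _ eM]
  · rw [if_neg hcnd, if_neg hcnd]


theorem pv_relaxC_spec {H W : Int} {grid : List (List String)} {a : List Int × Bool}
    {i j d : Int} (hI : pvInvB H W grid a.1) (hu : pvInR H W (i, j, d)) :
    pvInvB H W grid (pvRelaxC H W grid a i j d).1 ∧
      ((pvRelaxC H W grid a i j d = a ∧
        ∀ v w, pvEdge H W grid (i, j, d) v w →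
          pvFB W a.1 v ≤ pvFB W a.1 (i, j, d) + w) ∨
      ((pvRelaxC H W grid a i j d).1.sum < a.1.sum ∧
        (pvRelaxC H W grid a i j d).2 = true)) := by
  have h5 : 0 ≤ d := hu.2.2.2.2.1
  have h6 : d < 4 := hu.2.2.2.2.2
  have hc1 := (pv_turns_cover d h5 h6 (PySem.Int.mod (d + 1) 4)).mpr (Or.inl rfl)
  have hc3 := (pv_turns_cover d h5 h6 (PySem.Int.mod (d + 3) 4)).mpr (Or.inr rfl)
  have he1 : pvEdge H W grid (i, j, d) (i, j, PySem.Int.mod (d + 1) 4) 1 :=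
    pv_edge_turn grid i j d _ hc1.1 hc1.2.1 hc1.2.2.1 hc1.2.2.2
  have he3 : pvEdge H W grid (i, j, d) (i, j, PySem.Int.mod (d + 3) 4) 1 :=
    pv_edge_turn grid i j d _ hc3.1 hc3.2.1 hc3.2.2.1 hc3.2.2.2
  unfold pvRelaxC
  dsimp only
  obtain ⟨s1I, s1u, s1mono, s1v, s1ch⟩ :=
    pv_tryB_spec (grid := grid) a hI hu he1 rfl rfl
  set a1 := pvTryB W a (i, j, PySem.Int.mod (d + 1) 4) (pvFB W a.1 (i, j, d) + 1) with ha1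
  obtain ⟨s2I, s2u, s2mono, s2v, s2ch⟩ :=
    pv_tryB_spec (grid := grid) a1 s1I hu he3 s1u rfl
  set a2 := pvTryB W a1 (i, j, PySem.Int.mod (d + 3) 4) (pvFB W a.1 (i, j, d) + 1) with ha2
  have hsum1 : a1.1.sum ≤ a.1.sum := by
    rcases s1ch with h | ⟨h, _⟩
    · rw [h]
    · exact le_of_lt h
  have hsum2 : a2.1.sum ≤ a1.1.sum := by
    rcases s2ch with h | ⟨h, _⟩
    · rw [h]
    · exact le_of_lt h
  by_cases hcnd : 0 ≤ i - (pvDd d).1 ∧ i - (pvDd d).1 < H ∧ 0 ≤ j - (pvDd d).2 ∧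
      j - (pvDd d).2 < W
  · rw [if_pos hcnd]
    have hMv : pvMove H W grid i j d =
        some (i - (pvDd d).1, j - (pvDd d).2, pvNdC grid i j d) := by
      rw [pv_move_eq, if_pos hcnd]
    have he4 : pvEdge H W grid (i, j, d)
        (i - (pvDd d).1, j - (pvDd d).2, pvNdC grid i j d) 0 :=
      pv_edge_move grid i j d hMv
    obtain ⟨s3I, s3u, s3mono, s3v, s3ch⟩ :=
      pv_tryB_spec (grid := grid) (val := pvFB W a.1 (i, j, d)) a2 s2I hu he4 s2u (by omega)
    refine ⟨s3I, ?_⟩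
    rcases s3ch with h3e | ⟨h3s, h3f⟩
    · rcases s2ch with h2e | ⟨h2s, h2f⟩
      · rcases s1ch with h1e | ⟨h1s, h1f⟩
        · left
          rw [h3e, h2e, h1e]
          refine ⟨rfl, ?_⟩
          intro v w he
          rcases he with ⟨hw, hv1, hv2, hd0, hd4, hdne, hmod⟩ | ⟨hw0, hMv2⟩
          · have hvnd : v = (i, j, v.2.2) := by
              rw [Prod.ext_iff, Prod.ext_iff]
              exact ⟨hv1, hv2, rfl⟩
            rw [h2e, h1e] at s2v
            rw [h1e] at s1v
            rcases (pv_turns_cover d h5 h6 v.2.2).mp ⟨hd0, hd4, hdne, hmod⟩ with hcv | hcv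
            · rw [← hcv] at s1v
              rw [← hvnd] at s1v
              rw [hw]
              exact s1v
            · rw [← hcv] at s2v
              rw [← hvnd] at s2v
              rw [hw]
              exact s2v
          · rw [hMv] at hMv2
            cases hMv2
            rw [h3e, h2e, h1e] at s3v
            rw [hw0]
            exact s3v
        · right
          rw [h3e, h2e]
          exact ⟨h1s, h1f⟩
      · right
        rw [h3e]
        exact ⟨lt_of_lt_of_le h2s hsum1, h2f⟩
    · exact Or.inr ⟨lt_of_lt_of_le h3s (le_trans hsum2 hsum1), h3f⟩
  · rw [if_neg hcnd]
    have hMnone : pvMove H W grid i j d = none := by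
      rw [pv_move_eq, if_neg hcnd]
    refine ⟨s2I, ?_⟩
    rcases s2ch with h2e | ⟨h2s, h2f⟩
    · rcases s1ch with h1e | ⟨h1s, h1f⟩
      · left
        rw [h2e, h1e]
        refine ⟨rfl, ?_⟩
        intro v w he
        rcases he with ⟨hw, hv1, hv2, hd0, hd4, hdne, hmod⟩ | ⟨hw0, hMv2⟩
        · have hvnd : v = (i, j, v.2.2) := by
            rw [Prod.ext_iff, Prod.ext_iff]
            exact ⟨hv1, hv2, rfl⟩
          rw [h2e, h1e] at s2v
          rw [h1e] at s1v
          rcases (pv_turns_cover d h5 h6 v.2.2).mp ⟨hd0, hd4, hdne, hmod⟩ with hcv | hcv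
          · rw [← hcv] at s1v
            rw [← hvnd] at s1v
            rw [hw]
            exact s1v
          · rw [← hcv] at s2v
            rw [← hvnd] at s2v
            rw [hw]
            exact s2v
        · rw [hMnone] at hMv2
          exact absurd hMv2 (by simp)
      · right
        rw [h2e]
        exact ⟨h1s, h1f⟩
    · exact Or.inr ⟨lt_of_lt_of_le h2s hsum1, h2f⟩

theorem pv_relaxB_spec {H W : Int} {grid : List (List String)} {a : List Int × Bool}
    {i j d : Int} (hI : pvInvB H W grid a.1) (hu : pvInR H W (i, j, d)) :
    pvInvB H W grid (pvRelaxB H W grid a i j d).1 ∧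
      ((pvRelaxB H W grid a i j d = a ∧
        ∀ v w, pvEdge H W grid (i, j, d) v w →
          pvFB W a.1 v ≤ pvFB W a.1 (i, j, d) + w) ∨
      ((pvRelaxB H W grid a i j d).1.sum < a.1.sum ∧
        (pvRelaxB H W grid a i j d).2 = true)) := by
  rw [pv_relaxB_eq hu]
  exact pv_relaxC_spec hI hu

-- the list of all states, as the sweep traverses them
def pvCells (H W : Int) : List (Int × Int × Int) :=
  (PySem.List.pyRange 0 H 1).flatMap (fun i =>
    (PySem.List.pyRange 0 W 1).flatMap (fun j =>
      (PySem.List.pyRange 0 4 1).map (fun d => (i, j, d))))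

theorem pv_cells_mem {H W : Int} (u : Int × Int × Int) :
    u ∈ pvCells H W ↔ pvInR H W u := by
  constructor
  · intro h
    simp only [pvCells, List.mem_flatMap, List.mem_map, PySem.List.mem_pyRange_one] at h
    obtain ⟨i, hi, j, hj, d, hd, rfl⟩ := h
    exact ⟨hi.1, hi.2, hj.1, hj.2, hd.1, hd.2⟩
  · intro h
    obtain ⟨h1, h2, h3, h4, h5, h6⟩ := h
    simp only [pvCells, List.mem_flatMap, List.mem_map, PySem.List.mem_pyRange_one]
    exact ⟨u.1, ⟨h1, h2⟩, u.2.1, ⟨h3, h4⟩, u.2.2, ⟨h5, h6⟩, rfl⟩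

theorem pv_sweepB_eq (H W : Int) (grid : List (List String)) (s : List Int) :
    pvSweepB H W grid s =
      (pvCells H W).foldl (fun a u => pvRelaxB H W grid a u.1 u.2.1 u.2.2) (s, false) := by
  unfold pvSweepB pvCells
  rw [List.foldl_flatMap]
  apply PySem.List.foldl_congr_mem
  intro acc i _
  rw [List.foldl_flatMap]
  apply PySem.List.foldl_congr_mem
  intro acc j _
  rw [List.foldl_map]

theorem pv_cellsFoldB {H W : Int} {grid : List (List String)} :
    ∀ (l : List (Int × Int × Int)) (acc : List Int × Bool),
      (∀ u ∈ l, pvInR H W u) → pvInvB H W grid acc.1 →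
      pvInvB H W grid (l.foldl (fun a u => pvRelaxB H W grid a u.1 u.2.1 u.2.2) acc).1 ∧
        ((l.foldl (fun a u => pvRelaxB H W grid a u.1 u.2.1 u.2.2) acc = acc ∧
            ∀ u ∈ l, ∀ v w, pvEdge H W grid u v w →
              pvFB W acc.1 v ≤ pvFB W acc.1 u + w) ∨
          ((l.foldl (fun a u => pvRelaxB H W grid a u.1 u.2.1 u.2.2) acc).1.sum <
              acc.1.sum ∧
            (l.foldl (fun a u => pvRelaxB H W grid a u.1 u.2.1 u.2.2) acc).2 = true)) := by
  intro l
  induction l with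
  | nil =>
    intro acc _ hI
    exact ⟨hI, Or.inl ⟨rfl, by simp⟩⟩
  | cons x t ih =>
    intro acc hInR hI
    have hx : pvInR H W (x.1, x.2.1, x.2.2) := hInR x List.mem_cons_self
    simp only [List.foldl_cons]
    obtain ⟨rI, rdi⟩ := pv_relaxB_spec (a := acc) hI hx
    rcases rdi with ⟨req, rsat⟩ | ⟨rsum, rtrue⟩
    · rw [req]
      obtain ⟨tI, tdi⟩ := ih acc (fun y hy => hInR y (List.mem_cons_of_mem _ hy)) hI
      refine ⟨tI, ?_⟩
      rcases tdi with ⟨teq, tsat⟩ | hR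
      · left
        refine ⟨teq, ?_⟩
        intro y hy v w hvw
        rcases List.mem_cons.mp hy with rfl | hmem
        · exact rsat v w hvw
        · exact tsat y hmem v w hvw
      · right
        exact hR
    · obtain ⟨tI, tdi⟩ := ih (pvRelaxB H W grid acc x.1 x.2.1 x.2.2)
        (fun y hy => hInR y (List.mem_cons_of_mem _ hy)) rI
      refine ⟨tI, Or.inr ?_⟩
      rcases tdi with ⟨teq, _⟩ | ⟨tsum, ttrue⟩
      · rw [teq]
        exact ⟨rsum, rtrue⟩
      · exact ⟨lt_trans tsum rsum, ttrue⟩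

theorem pv_sweepB_spec {H W : Int} {grid : List (List String)} {s : List Int}
    (hI : pvInvB H W grid s) :
    pvInvB H W grid (pvSweepB H W grid s).1 ∧
      (((pvSweepB H W grid s).1 = s ∧ (pvSweepB H W grid s).2 = false ∧
          pvConsF H W grid (pvFB W s)) ∨
        ((pvSweepB H W grid s).1.sum < s.sum ∧ (pvSweepB H W grid s).2 = true)) := by
  rw [pv_sweepB_eq]
  obtain ⟨rI, rdi⟩ := pv_cellsFoldB (pvCells H W) (s, false)
    (fun u hu => (pv_cells_mem u).mp hu) hI
  refine ⟨rI, ?_⟩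
  rcases rdi with ⟨req, rsat⟩ | hR
  · left
    rw [req]
    refine ⟨rfl, rfl, ?_⟩
    intro u hu v w hvw
    exact rsat u ((pv_cells_mem u).mpr hu) v w hvw
  · right
    exact hR

theorem pv_loopAlt_spec {H W : Int} {grid : List (List String)} :
    ∀ (n : Nat) (s : List Int), pvInvB H W grid s → s.sum < (n : Int) →
      pvInvB H W grid (pvLoopAlt H W grid n s) ∧
        pvConsF H W grid (pvFB W (pvLoopAlt H W grid n s)) := by
  intro n
  induction n with
  | zero =>
    intro s hI hlt
    have h0 : 0 ≤ s.sum := List.sum_nonneg (fun x hx => (hI.lb x hx).1)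
    simp at hlt
    omega
  | succ n ih =>
    intro s hI hlt
    obtain ⟨rI, rdi⟩ := pv_sweepB_spec (grid := grid) hI
    simp only [pvLoopAlt]
    rcases rdi with ⟨r1, r2, rcons⟩ | ⟨rsum, rtrue⟩
    · rw [r2]
      simp only [Bool.false_eq_true, if_false, r1]
      exact ⟨hI, rcons⟩
    · rw [rtrue]
      simp only [if_true]
      apply ih _ rI
      push_cast at hlt ⊢
      omega

-- ---------- B's seeding ----------

theorem pv_seedAlt_spec {H W : Int} (grid : List (List String)) (hH : 1 ≤ H) (hW : 1 ≤ W) :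
    pvInvB H W grid (pvSeedAlt H W grid) ∧ (pvSeedAlt H W grid).sum ≤ 400 * H * W := by
  have hu0 := pv_baseInR hH hW 0 (by omega) (by omega)
  have hu1 := pv_baseInR hH hW 1 (by omega) (by omega)
  have hu3 := pv_baseInR hH hW 3 (by omega) (by omega)
  have hbW : 0 ≤ (H - 1) * W := mul_nonneg (by omega) (by omega)
  have e0 : (0 : Int) ≤ ((H - 1) * W + (W - 1)) * 4 + 0 := by omega
  have e1 : (0 : Int) ≤ ((H - 1) * W + (W - 1)) * 4 + 1 := by omega
  have e3 : (0 : Int) ≤ ((H - 1) * W + (W - 1)) * 4 + 3 := by omega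
  set goal := PySem.List.pyGetD (PySem.List.pyGetD grid (-1) []) (-1) "" with hgoal
  set k : Int := if goal = "A" then 0 else if goal = "B" then 1 else 3 with hk
  set v0 : Int := if (0 : Int) = k then 0 else 1 with hv0
  set v1 : Int := if (1 : Int) = k then 0 else 1 with hv1
  set v3 : Int := if (3 : Int) = k then 0 else 1 with hv3
  set s0 : List Int := List.replicate (4 * H * W).toNat 100 with hs0
  have hvb0 : 0 ≤ v0 ∧ v0 ≤ 1 := by rw [hv0]; split_ifs <;> omega
  have hvb1 : 0 ≤ v1 ∧ v1 ≤ 1 := by rw [hv1]; split_ifs <;> omega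
  have hvb3 : 0 ≤ v3 ∧ v3 ≤ 1 := by rw [hv3]; split_ifs <;> omega
  have hne01 : ((H - 1, W - 1, (0 : Int)) : Int × Int × Int) ≠ (H - 1, W - 1, 1) := by simp
  have hne03 : ((H - 1, W - 1, (0 : Int)) : Int × Int × Int) ≠ (H - 1, W - 1, 3) := by simp
  have hne13 : ((H - 1, W - 1, (1 : Int)) : Int × Int × Int) ≠ (H - 1, W - 1, 3) := by simp
  have hseedAlt : pvSeedAlt H W grid =
      ((s0.set (pvEnc W (H - 1, W - 1, 0)).toNat v0).set
        (pvEnc W (H - 1, W - 1, 1)).toNat v1).set (pvEnc W (H - 1, W - 1, 3)).toNat v3 := by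
    unfold pvSeedAlt
    simp only [List.foldl_cons, List.foldl_nil]
    rw [pv_pySetD_nonneg _ e0, pv_pySetD_nonneg _ e1, pv_pySetD_nonneg _ e3]
    rfl
  have hlen0 : s0.length = (4 * H * W).toNat := by rw [hs0, List.length_replicate]
  have hlen1 : (s0.set (pvEnc W (H - 1, W - 1, 0)).toNat v0).length = (4 * H * W).toNat := by
    rw [List.length_set]; exact hlen0
  have hlen2 : ((s0.set (pvEnc W (H - 1, W - 1, 0)).toNat v0).set
      (pvEnc W (H - 1, W - 1, 1)).toNat v1).length = (4 * H * W).toNat := by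
    rw [List.length_set]; exact hlen1
  have hlen3 : (((s0.set (pvEnc W (H - 1, W - 1, 0)).toNat v0).set
      (pvEnc W (H - 1, W - 1, 1)).toNat v1).set (pvEnc W (H - 1, W - 1, 3)).toNat v3).length =
      (4 * H * W).toNat := by
    rw [List.length_set]; exact hlen2
  have hFB0 : ∀ u, pvInR H W u → pvFB W s0 u = 100 := by
    intro u hu
    have hb := pv_enc_bounds hu
    unfold pvFB
    rw [hs0]
    exact List.getD_replicate _ (by omega)
  have hFB : ∀ u, pvInR H W u →
      pvFB W (((s0.set (pvEnc W (H - 1, W - 1, 0)).toNat v0).set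
        (pvEnc W (H - 1, W - 1, 1)).toNat v1).set (pvEnc W (H - 1, W - 1, 3)).toNat v3) u =
      if u = (H - 1, W - 1, 3) then v3 else if u = (H - 1, W - 1, 1) then v1
      else if u = (H - 1, W - 1, 0) then v0 else 100 := by
    intro u hu
    rw [pv_FB_set hlen2 hu hu3, pv_FB_set hlen1 hu hu1, pv_FB_set hlen0 hu hu0]
    by_cases e3' : u = (H - 1, W - 1, 3)
    · rw [if_pos e3', if_pos e3']
    · rw [if_neg e3', if_neg e3']
      by_cases e1' : u = (H - 1, W - 1, 1)
      · rw [if_pos e1', if_pos e1']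
      · rw [if_neg e1', if_neg e1']
        by_cases e0' : u = (H - 1, W - 1, 0)
        · rw [if_pos e0', if_pos e0']
        · rw [if_neg e0', if_neg e0', hFB0 u hu]
  have hseeds : pvSeeds H W grid =
      [((H - 1, W - 1, 0), v0), ((H - 1, W - 1, 1), v1), ((H - 1, W - 1, 3), v3)] := by
    unfold pvSeeds pvSeedsOf
    rw [← hgoal, hv0, hv1, hv3, hk]
    by_cases hA : goal = "A"
    · simp only [if_pos hA]
      norm_num
    · by_cases hB : goal = "B"
      · simp only [if_neg hA, if_pos hB]
        norm_num
      · simp only [if_neg hA, if_neg hB]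
        norm_num
  rw [hseedAlt]
  have hmemv : ∀ x ∈ ((s0.set (pvEnc W (H - 1, W - 1, 0)).toNat v0).set
      (pvEnc W (H - 1, W - 1, 1)).toNat v1).set (pvEnc W (H - 1, W - 1, 3)).toNat v3,
      0 ≤ x ∧ x ≤ 100 := by
    intro x hx
    rcases List.mem_or_eq_of_mem_set hx with h | rfl
    · rcases List.mem_or_eq_of_mem_set h with h2 | rfl
      · rcases List.mem_or_eq_of_mem_set h2 with h3 | rfl
        · rw [hs0] at h3
          rw [List.eq_of_mem_replicate h3]
          omega
        · omega
      · omega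
    · omega
  refine ⟨⟨hlen3, hmemv, ?_, ?_⟩, ?_⟩
  · -- achievability
    intro u hu
    rw [hFB u hu]
    by_cases e3' : u = (H - 1, W - 1, 3)
    · rw [if_pos e3']
      right
      rw [e3']
      exact pvWalk.src _ _ (by rw [hseeds]; simp)
    · rw [if_neg e3']
      by_cases e1' : u = (H - 1, W - 1, 1)
      · rw [if_pos e1']
        right
        rw [e1']
        exact pvWalk.src _ _ (by rw [hseeds]; simp)
      · rw [if_neg e1']
        by_cases e0' : u = (H - 1, W - 1, 0)
        · rw [if_pos e0']
          right
          rw [e0']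
          exact pvWalk.src _ _ (by rw [hseeds]; simp)
        · rw [if_neg e0']
          left
          rfl
  · -- seedLe
    intro x c hxc
    rw [hseeds] at hxc
    simp only [List.mem_cons, Prod.mk.injEq, List.not_mem_nil, or_false] at hxc
    rcases hxc with ⟨rfl, rfl⟩ | ⟨rfl, rfl⟩ | ⟨rfl, rfl⟩
    · rw [hFB _ hu0, if_neg hne03, if_neg hne01, if_pos rfl]
    · rw [hFB _ hu1, if_neg hne13, if_pos rfl]
    · rw [hFB _ hu3, if_pos rfl]
  · -- sum bound
    have hb0 := pv_enc_bounds (W := W) hu0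
    have hb1 := pv_enc_bounds (W := W) hu1
    have hb3 := pv_enc_bounds (W := W) hu3
    have hi0 : (pvEnc W (H - 1, W - 1, 0)).toNat < s0.length := by rw [hlen0]; omega
    have hi1 : (pvEnc W (H - 1, W - 1, 1)).toNat <
        (s0.set (pvEnc W (H - 1, W - 1, 0)).toNat v0).length := by rw [hlen1]; omega
    have hi3 : (pvEnc W (H - 1, W - 1, 3)).toNat <
        ((s0.set (pvEnc W (H - 1, W - 1, 0)).toNat v0).set
          (pvEnc W (H - 1, W - 1, 1)).toNat v1).length := by rw [hlen2]; omega
    have hgd0 : s0.getD (pvEnc W (H - 1, W - 1, 0)).toNat 0 = 100 := by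
      have := hFB0 _ hu0
      unfold pvFB at this
      rw [List.getD_eq_getElem _ _ hi0]
      rw [List.getD_eq_getElem _ _ hi0] at this
      exact this
    have hgd1 : (s0.set (pvEnc W (H - 1, W - 1, 0)).toNat v0).getD
        (pvEnc W (H - 1, W - 1, 1)).toNat 0 = 100 := by
      have h := pv_FB_set (H := H) hlen0 hu1 hu0 v0
      rw [if_neg (Ne.symm hne01), hFB0 _ hu1] at h
      unfold pvFB at h
      rw [List.getD_eq_getElem _ _ hi1]
      rw [List.getD_eq_getElem _ _ hi1] at h
      exact h
    have hgd3 : ((s0.set (pvEnc W (H - 1, W - 1, 0)).toNat v0).set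
        (pvEnc W (H - 1, W - 1, 1)).toNat v1).getD (pvEnc W (H - 1, W - 1, 3)).toNat 0 = 100 := by
      have h2 := pv_FB_set (H := H) hlen1 hu3 hu1 v1
      have h1 := pv_FB_set (H := H) hlen0 hu3 hu0 v0
      rw [if_neg (Ne.symm hne13), h1, if_neg (Ne.symm hne03), hFB0 _ hu3] at h2
      unfold pvFB at h2
      rw [List.getD_eq_getElem _ _ hi3]
      rw [List.getD_eq_getElem _ _ hi3] at h2
      exact h2
    have hHW0 : (0 : Int) ≤ H * W := mul_nonneg (by omega) (by omega)
    have hsum0 : s0.sum = 4 * H * W * 100 := by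
      rw [hs0, List.sum_replicate, nsmul_eq_mul]
      rw [Int.toNat_of_nonneg (by nlinarith)]
    rw [pv_sum_set _ _ hi3, hgd3, pv_sum_set _ _ hi1, hgd1, pv_sum_set _ _ hi0, hgd0, hsum0]
    have hr : (4 : Int) * H * W * 100 = 400 * H * W := by ring
    omega

-- ===== VERDICT (by name: the statement is the Claim_ definition above) =====
theorem solve_spec : Claim_equal_solve := by
  intro H W grid hdom hpre
  obtain ⟨hH, hW, _, _, _⟩ := hpre
  unfold Spec_solve
  obtain ⟨hIN, h100, hsumN⟩ := pv_seedN_inv (grid := grid) hH hW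
  have hqInR : ∀ u ∈ [(H - 1, W - 1, (0 : Int)), (H - 1, W - 1, (1 : Int)),
      (H - 1, W - 1, (3 : Int))], pvInR H W u := by
    intro u hu
    simp only [List.mem_cons, List.not_mem_nil, or_false] at hu
    rcases hu with rfl | rfl | rfl
    · exact pv_baseInR hH hW 0 (by omega) (by omega)
    · exact pv_baseInR hH hW 1 (by omega) (by omega)
    · exact pv_baseInR hH hW 3 (by omega) (by omega)
  have hpend : pvPend H W grid (pvSeedN H W grid)
      [(H - 1, W - 1, (0 : Int)), (H - 1, W - 1, 1), (H - 1, W - 1, 3)] := by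
    intro u hu
    by_cases hq : u ∈ [(H - 1, W - 1, (0 : Int)), (H - 1, W - 1, 1), (H - 1, W - 1, 3)]
    · exact Or.inr hq
    · left
      intro v w he
      obtain ⟨hvInR, hw0, _, _⟩ := pv_edge_target hu he
      have h1 := h100 u hu hq
      have h2 := (pv_lb_G hIN.shape hIN.lb hvInR).2
      omega
  have hmul : (0 : Int) ≤ H * W := mul_nonneg (by omega) (by omega)
  have hfuelA : 2 * pvSum (pvSeedN H W grid) +
      ((([(H - 1, W - 1, (0 : Int)), (H - 1, W - 1, 1),
        (H - 1, W - 1, 3)].length : Nat) : Int)) < (((800 * H * W + 8).toNat : Nat) : Int) := by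
    have hc : (((800 * H * W + 8).toNat : Nat) : Int) = 800 * H * W + 8 :=
      Int.toNat_of_nonneg (by nlinarith [hmul])
    rw [hc]
    have h2 : (800 : Int) * H * W = 2 * (400 * H * W) := by ring
    simp only [List.length_cons, List.length_nil]
    push_cast
    omega
  obtain ⟨hIA, hconsA⟩ := pv_loopA_spec (grid := grid) (800 * H * W + 8).toNat
    (pvSeedN H W grid) _ ⟨hIN, hqInR, hpend⟩ hfuelA
  obtain ⟨hIB0, hsumB⟩ := pv_seedAlt_spec grid hH hW
  have hfuelB : (pvSeedAlt H W grid).sum < (((400 * H * W + 4).toNat : Nat) : Int) := by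
    have hc : (((400 * H * W + 4).toNat : Nat) : Int) = 400 * H * W + 4 :=
      Int.toNat_of_nonneg (by nlinarith [hmul])
    rw [hc]
    omega
  obtain ⟨hIBf, hconsB⟩ := pv_loopAlt_spec (grid := grid) (400 * H * W + 4).toNat
    (pvSeedAlt H W grid) hIB0 hfuelB
  have h000 : pvInR H W ((0 : Int), (0 : Int), (0 : Int)) := by
    refine ⟨?_, ?_, ?_, ?_, ?_, ?_⟩ <;> dsimp only <;> omega
  have hkey := pv_unique hH hW
    (fun u hu => pv_lb_G hIA.shape hIA.lb hu) hconsA hIA.seedLe hIA.ach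
    (pv_FB_bnd hIBf) hconsB hIBf.seedLe hIBf.ach ((0 : Int), (0 : Int), (0 : Int)) h000
  show solve H W grid = solve_alt H W grid
  unfold solve solve_alt
  rw [pv_seedA_eq hH hW, PySem.List.pyGetD_zero]
  have hB : pvFB W (pvLoopAlt H W grid (400 * H * W + 4).toNat (pvSeedAlt H W grid))
      ((0 : Int), (0 : Int), (0 : Int)) =
      (pvLoopAlt H W grid (400 * H * W + 4).toNat (pvSeedAlt H W grid)).getD 0 100 := by
    unfold pvFB pvEnc
    norm_num
  rw [← hB]
  exact hkey
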